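-- pv_equiv track=rewrite | github.com/eliottcassidy2000/math | 03-artifacts/code/paths_via_cycles_test.py | paths_using_arc
-- ===== SOURCE A (Python) =====
-- def paths_using_arc(T, i, j):
--     """Count Ham paths in T that use arc i->j (i immediately before j)."""
--     n = len(T)
--     if not T[i][j]:
--         return 0
--
--     full = (1 << n) - 1
--     dp = [[0]*n for _ in range(1 << n)]
--     for v in range(n):
--         dp[1 << v][v] = 1
--
--     # dp_used tracks paths that have used i->j
--     dp_used = [[0]*n for _ in range(1 << n)]
--
--     for mask in range(1, 1 << n):
--         for v in range(n):
--             if not (mask & (1 << v)):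
--                 continue
--             c = dp[mask][v]
--             cu = dp_used[mask][v]
--             if c == 0 and cu == 0:
--                 continue
--             for u in range(n):
--                 if mask & (1 << u):
--                     continue
--                 if T[v][u]:
--                     nmask = mask | (1 << u)
--                     dp[nmask][u] += c
--                     if v == i and u == j:
--                         dp_used[nmask][u] += cu + c
--                     else:
--                         dp_used[nmask][u] += cu
--
--     return sum(dp_used[full][v] for v in range(n))
-- ===== SOURCE B (Python) =====
-- def paths_using_arc(T, i, j):
--     """Count Ham paths in T that use arc i->j, by pairing each prefix that
--     ends at i with a complementary suffix that starts at j."""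
--     n = len(T)
--     if not T[i][j]:
--         return 0
--     size = 1 << n
--     # e[mask][v]: number of Ham paths on the vertex set mask ending at v
--     e = [[0] * n for _ in range(size)]
--     # f[mask][v]: number of Ham paths on mask starting at j and ending at v
--     f = [[0] * n for _ in range(size)]
--     for v in range(n):
--         e[1 << v][v] = 1
--     f[1 << j][j] = 1
--     for mask in range(1, size):
--         for v in range(n):
--             if not (mask >> v) & 1 or mask == (1 << v):
--                 continue
--             rest = mask ^ (1 << v)
--             ev = fv = 0
--             for u in range(n):
--                 if (rest >> u) & 1 and T[u][v]:
--                     ev += e[rest][u]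
--                     fv += f[rest][u]
--             e[mask][v] = ev
--             f[mask][v] = fv
--     full = size - 1
--     total = 0
--     for A in range(size):
--         if (A >> i) & 1 and not (A >> j) & 1:
--             total += e[A][i] * sum(f[full ^ A][v] for v in range(n))
--     return total
-- ===== Notes on version B (the rewrite author's own statement) =====
-- stated objective: alternative
-- what changed: Instead of A's single forward push-DP that drags a second 'already used the arc' table through every state, B builds two independent pull-DP tables (paths ending at v, and paths starting at j ending at v) and counts by pairing each prefix ending at i with the complementary suffix starting at j over all mask splits.
-- outside the precondition, e.g. on paths_using_arc([[0, 1], [1, 0]], -2, 1): A returns 0, B raises ValueError; on paths_using_arc([[1, 1, 1], [1, 1]], 0, 2): A returns 0, B raises IndexError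
import Mathlib
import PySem

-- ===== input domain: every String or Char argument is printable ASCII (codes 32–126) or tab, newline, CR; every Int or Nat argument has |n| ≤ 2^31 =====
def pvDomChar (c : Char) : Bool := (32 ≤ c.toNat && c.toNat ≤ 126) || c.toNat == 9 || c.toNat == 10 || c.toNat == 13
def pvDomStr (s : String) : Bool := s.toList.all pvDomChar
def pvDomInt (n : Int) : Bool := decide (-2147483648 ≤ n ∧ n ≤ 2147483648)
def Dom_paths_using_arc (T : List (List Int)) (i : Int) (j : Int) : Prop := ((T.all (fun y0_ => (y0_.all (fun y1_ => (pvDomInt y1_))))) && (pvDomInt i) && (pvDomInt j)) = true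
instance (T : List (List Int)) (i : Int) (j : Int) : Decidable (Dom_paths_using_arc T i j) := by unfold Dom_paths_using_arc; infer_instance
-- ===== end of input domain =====

-- B pairs each prefix ending at i with the complementary suffix starting at j (two pull-DP
-- tables + a convolution over mask splits) instead of A's push DP with a 'used the arc' table.

-- shared small helpers: 2-d table entry read / write (tables are rectangular 2^n × n lists)
def pvGet2 (T : List (List Int)) (u v : Nat) : Int := (T.getD u []).getD v 0
def pvTget (t : List (List Int)) (m v : Nat) : Int := (t.getD m []).getD v 0
def pvTset (t : List (List Int)) (m v : Nat) (x : Int) : List (List Int) :=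
  t.modify m (fun row => row.set v x)
def pvTadd (t : List (List Int)) (m v : Nat) (x : Int) : List (List Int) :=
  t.modify m (fun row => row.modify v (fun y => y + x))
-- T[i][j] with Python indexing (pyGet?); on the IndexError cases (excluded by Pre_) we read 0
def pvArc (T : List (List Int)) (i j : Int) : Int :=
  ((PySem.List.pyGet? T i).bind (fun r => PySem.List.pyGet? r j)).getD 0

-- ===== PORT A =====
-- body of A's 'for mask in range(1, 1<<n)' loop (v-loop with nested u-loop, updating dp, dp_used)
def pvAstep (T : List (List Int)) (i j : Int) (mask : Nat)
    (s : List (List Int) × List (List Int)) : List (List Int) × List (List Int) :=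
  (List.range T.length).foldl (fun s v =>
    if ¬ mask.testBit v then s
    else
      let c := pvTget s.1 mask v
      let cu := pvTget s.2 mask v
      if c = 0 ∧ cu = 0 then s
      else
        (List.range T.length).foldl (fun s u =>
          if mask.testBit u then s
          else if pvGet2 T v u ≠ 0 then
            let nmask := mask ||| 2 ^ u
            (pvTadd s.1 nmask u c,
             if (v : Int) = i ∧ (u : Int) = j then pvTadd s.2 nmask u (cu + c)
             else pvTadd s.2 nmask u cu)
          else s) s) s

-- range(1, 1<<n) is ported as (List.range (2^n)).drop 1 (exact: both are [1, …, 2^n-1])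
def paths_using_arc (T : List (List Int)) (i : Int) (j : Int) : Int :=
  let n := T.length
  if pvArc T i j = 0 then 0
  else
    let full := 2 ^ n - 1
    let dp0 := (List.range n).foldl (fun t v => pvTset t (2 ^ v) v 1)
                 (List.replicate (2 ^ n) (List.replicate n (0 : Int)))
    let du0 := List.replicate (2 ^ n) (List.replicate n (0 : Int))
    let s := ((List.range (2 ^ n)).drop 1).foldl (fun s mask => pvAstep T i j mask s) (dp0, du0)
    (List.range n).foldl (fun acc v => acc + pvTget s.2 full v) 0

-- ===== PORT B =====
-- body of B's mask loop: pull-compute e[mask][v], f[mask][v] from the already-final rows mask^(1<<v)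
def pvBstep (T : List (List Int)) (mask : Nat)
    (s : List (List Int) × List (List Int)) : List (List Int) × List (List Int) :=
  (List.range T.length).foldl (fun s v =>
    if ¬ mask.testBit v ∨ mask = 2 ^ v then s
    else
      let rest := mask ^^^ 2 ^ v
      let p := (List.range T.length).foldl (fun (p : Int × Int) u =>
          if rest.testBit u ∧ pvGet2 T u v ≠ 0 then
            (p.1 + pvTget s.1 rest u, p.2 + pvTget s.2 rest u)
          else p) ((0 : Int), (0 : Int))
      (pvTset s.1 mask v p.1, pvTset s.2 mask v p.2)) s

-- bit tests (A >> i) & 1 and shifts 1 << j are ported through i.toNat / j.toNat: exact for the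
-- 0 ≤ i, 0 ≤ j admitted by Pre_ (Python raises ValueError on a negative shift, excluded there)
def paths_using_arc_alt (T : List (List Int)) (i : Int) (j : Int) : Int :=
  let n := T.length
  if pvArc T i j = 0 then 0
  else
    let size := 2 ^ n
    let e0 := (List.range n).foldl (fun t v => pvTset t (2 ^ v) v 1)
                (List.replicate size (List.replicate n (0 : Int)))
    let f0 := pvTset (List.replicate size (List.replicate n (0 : Int))) (2 ^ j.toNat) j.toNat 1
    let s := ((List.range size).drop 1).foldl (fun s mask => pvBstep T mask s) (e0, f0)
    let full := size - 1
    (List.range size).foldl (fun total A =>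
      if A.testBit i.toNat ∧ ¬ A.testBit j.toNat then
        total + pvTget s.1 A i.toNat *
          ((List.range n).foldl (fun acc v => acc + pvTget s.2 (full ^^^ A) v) 0)
      else total) 0

-- ===== PRECONDITION & SPEC =====
-- Pre_ requires T[i][j] to exist (else A raises IndexError) and, only when that guard entry is
-- nonzero, that 0 ≤ i, j < len(T) with no row shorter than len(T): outside that, A either raises
-- IndexError in its table loops (short rows), or — when i or j is negative (Python wraparound) or
-- j indexes past len(T) into a longer row i — A returns 0 because the loop variables never equal
-- such an i or j, while B raises (ValueError on a negative shift / IndexError on f[1 << j]).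
def Pre_paths_using_arc (T : List (List Int)) (i : Int) (j : Int) : Prop :=
  ((PySem.List.pyGet? T i).bind fun r => PySem.List.pyGet? r j) ≠ none ∧
  (pvArc T i j ≠ 0 →
    0 ≤ i ∧ i < T.length ∧ 0 ≤ j ∧ j < T.length ∧ ∀ row ∈ T, T.length ≤ row.length)
instance (T : List (List Int)) (i : Int) (j : Int) : Decidable (Pre_paths_using_arc T i j) := by
  unfold Pre_paths_using_arc; infer_instance

def pvWitness_paths_using_arc : List (List Int) × Int × Int := ([[0, 1], [0, 0]], 0, 1)

def Spec_paths_using_arc (T : List (List Int)) (i : Int) (j : Int) (out : Int) : Prop := out = paths_using_arc_alt T i j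
instance (T : List (List Int)) (i : Int) (j : Int) (out : Int) : Decidable (Spec_paths_using_arc T i j out) := by unfold Spec_paths_using_arc; infer_instance

-- ===== CLAIM (what is proved, stated in full; the proofs are below) =====
def Claim_equal_paths_using_arc : Prop := ∀ (T : List (List Int)) (i : Int) (j : Int), Dom_paths_using_arc T i j → Pre_paths_using_arc T i j → Spec_paths_using_arc T i j (paths_using_arc T i j)


-- ===== LEMMAS AND PROOFS =====

def pvShape (n : Nat) (t : List (List Int)) : Prop :=
  t.length = 2 ^ n ∧ ∀ row ∈ t, row.length = n

lemma pvShape_replicate (n : Nat) :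
    pvShape n (List.replicate (2 ^ n) (List.replicate n (0 : Int))) := by
  constructor
  · simp
  · intro row hrow
    simp [List.eq_of_mem_replicate hrow]

lemma pvShape_tset {n : Nat} {t : List (List Int)} (h : pvShape n t)
    {m : Nat} (hm : m < 2 ^ n) (v : Nat) (x : Int) :
    pvShape n (pvTset t m v x) := by
  refine ⟨by simp [pvTset, h.1], ?_⟩
  intro row hrow
  rw [pvTset, List.modify_eq_set] at hrow
  rcases List.mem_or_eq_of_mem_set hrow with h' | rfl
  · exact h.2 _ h'
  · rw [List.length_set]
    have hm' : m < t.length := h.1 ▸ hm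
    rw [List.getElem?_eq_getElem hm', Option.getD_some]
    exact h.2 _ (List.getElem_mem hm')

lemma pvShape_tadd {n : Nat} {t : List (List Int)} (h : pvShape n t)
    {m : Nat} (hm : m < 2 ^ n) (v : Nat) (x : Int) :
    pvShape n (pvTadd t m v x) := by
  refine ⟨by simp [pvTadd, h.1], ?_⟩
  intro row hrow
  rw [pvTadd, List.modify_eq_set] at hrow
  rcases List.mem_or_eq_of_mem_set hrow with h' | rfl
  · exact h.2 _ h'
  · rw [List.length_modify]
    have hm' : m < t.length := h.1 ▸ hm
    rw [List.getElem?_eq_getElem hm', Option.getD_some]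
    exact h.2 _ (List.getElem_mem hm')

lemma pvTget_replicate {n : Nat} (p q : Nat) :
    pvTget (List.replicate (2 ^ n) (List.replicate n (0 : Int))) p q = 0 := by
  unfold pvTget
  simp only [List.getD_eq_getElem?_getD, List.getElem?_replicate]
  by_cases hp : p < 2 ^ n
  · by_cases hq : q < n <;> simp [hp, hq]
  · simp [hp]

lemma pv_getD_modify (l : List (List Int)) (f : List Int → List Int) (m p : Nat) :
    (l.modify m f).getD p [] = if m = p ∧ p < l.length then f (l.getD p []) else l.getD p [] := by
  simp only [List.getD_eq_getElem?_getD, List.getElem?_modify]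
  by_cases h : m = p
  · subst h
    by_cases hlt : m < l.length
    · simp [List.getElem?_eq_getElem hlt, hlt]
    · have hnone : l[m]? = none := List.getElem?_eq_none_iff.2 (by omega)
      simp [hnone, hlt]
  · simp [h]

lemma pv_getD_set (r : List Int) (v q : Nat) (x : Int) :
    (r.set v x).getD q 0 = if v = q ∧ q < r.length then x else r.getD q 0 := by
  simp only [List.getD_eq_getElem?_getD, List.getElem?_set]
  by_cases h : v = q
  · subst h
    by_cases hlt : v < r.length <;> simp [hlt]
  · simp [h]

lemma pv_getD_modify_add (r : List Int) (v q : Nat) (x : Int) :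
    (r.modify v (fun y => y + x)).getD q 0 = if v = q ∧ q < r.length then r.getD q 0 + x else r.getD q 0 := by
  simp only [List.getD_eq_getElem?_getD, List.getElem?_modify]
  by_cases h : v = q
  · subst h
    by_cases hlt : v < r.length
    · simp [List.getElem?_eq_getElem hlt, hlt]
    · have hnone : r[v]? = none := List.getElem?_eq_none_iff.2 (by omega)
      simp [hnone, hlt]
  · simp [h]

lemma pvTget_tset {n : Nat} {t : List (List Int)} (h : pvShape n t)
    {m v : Nat} (hm : m < 2 ^ n) (hv : v < n) (x : Int) (p q : Nat) :
    pvTget (pvTset t m v x) p q = if p = m ∧ q = v then x else pvTget t p q := by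
  unfold pvTget pvTset
  rw [pv_getD_modify]
  by_cases hpm : m = p
  · subst hpm
    have hp : m < t.length := h.1 ▸ hm
    have hlen : (t.getD m ([] : List Int)).length = n := by
      rw [List.getD_eq_getElem?_getD, List.getElem?_eq_getElem hp, Option.getD_some]
      exact h.2 _ (List.getElem_mem hp)
    rw [if_pos ⟨rfl, hp⟩, pv_getD_set, hlen]
    by_cases hqv : v = q
    · subst hqv; simp [hlen, hv]
    · have hq2 : ¬ q = v := fun hh => hqv hh.symm
      simp [hqv, hq2]
  · have hne : ¬ (p = m ∧ q = v) := fun hh => hpm hh.1.symm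
    simp [hpm, hne]

lemma pvTget_tadd {n : Nat} {t : List (List Int)} (h : pvShape n t)
    {m v : Nat} (hm : m < 2 ^ n) (hv : v < n) (x : Int) (p q : Nat) :
    pvTget (pvTadd t m v x) p q = if p = m ∧ q = v then pvTget t p q + x else pvTget t p q := by
  unfold pvTget pvTadd
  rw [pv_getD_modify]
  by_cases hpm : m = p
  · subst hpm
    have hp : m < t.length := h.1 ▸ hm
    have hlen : (t.getD m ([] : List Int)).length = n := by
      rw [List.getD_eq_getElem?_getD, List.getElem?_eq_getElem hp, Option.getD_some]
      exact h.2 _ (List.getElem_mem hp)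
    rw [if_pos ⟨rfl, hp⟩, pv_getD_modify_add, hlen]
    by_cases hqv : v = q
    · subst hqv; simp [hlen, hv]
    · have hq2 : ¬ q = v := fun hh => hqv hh.symm
      simp [hqv, hq2]
  · have hne : ¬ (p = m ∧ q = v) := fun hh => hpm hh.1.symm
    simp [hpm, hne]

lemma pv_foldl_sum (f : Nat → Int) (k : Nat) (a : Int) :
    (List.range k).foldl (fun acc v => acc + f v) a = a + ∑ v ∈ Finset.range k, f v := by
  induction k generalizing a with
  | zero => simp
  | succ k ih => rw [List.range_succ, List.foldl_append, Finset.sum_range_succ]; simp [ih]; ring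

lemma pv_drop_one_range (k : Nat) : (List.range k).drop 1 = List.range' 1 (k - 1) := by
  cases k with
  | zero => simp
  | succ k => rw [List.range_eq_range', List.range'_succ]; simp

lemma pv_foldl_range'_inv {σ : Type} (step : σ → Nat → σ) (Inv : Nat → σ → Prop)
    (len : Nat) : ∀ (start : Nat) (s : σ),
    (∀ m s', start ≤ m → m < start + len → Inv m s' → Inv (m + 1) (step s' m)) →
    Inv start s → Inv (start + len) ((List.range' start len).foldl step s) := by
  induction len with
  | zero => intro start s _ h; simpa using h
  | succ len ih =>
    intro start s hstep h
    rw [List.range'_succ]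
    have := ih (start + 1) (step s start)
      (fun m s' hm hm' hi => hstep m s' (by omega) (by omega) hi)
      (hstep start s le_rfl (by omega) h)
    simpa [Nat.add_comm, Nat.add_assoc, Nat.add_left_comm] using this

-- ---- bit lemmas ----
lemma pv_xor_lt {m v : Nat} (h : m.testBit v = true) : m ^^^ 2 ^ v < m := by
  apply Nat.lt_of_testBit v
  · simp [Nat.testBit_xor, h]
  · exact h
  · intro k hk
    simp [Nat.testBit_xor, Nat.testBit_two_pow, Nat.ne_of_lt hk]

lemma pv_or_xor {m w : Nat} (h : m.testBit w = false) : (m ||| 2 ^ w) ^^^ 2 ^ w = m := by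
  apply Nat.eq_of_testBit_eq
  intro k
  by_cases hk : w = k
  · subst hk; simp [Nat.testBit_xor, Nat.testBit_or, Nat.testBit_two_pow, h]
  · simp [Nat.testBit_xor, Nat.testBit_or, Nat.testBit_two_pow, hk]

lemma pv_xor_or {m v : Nat} (h : m.testBit v = true) : (m ^^^ 2 ^ v) ||| 2 ^ v = m := by
  apply Nat.eq_of_testBit_eq
  intro k
  by_cases hk : v = k
  · subst hk; simp [Nat.testBit_xor, Nat.testBit_or, Nat.testBit_two_pow, h]
  · simp [Nat.testBit_xor, Nat.testBit_or, Nat.testBit_two_pow, hk]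

lemma pv_testBit_xor_self {m v : Nat} : (m ^^^ 2 ^ v).testBit v = !m.testBit v := by
  simp [Nat.testBit_xor, Nat.testBit_two_pow]

lemma pv_testBit_or_self {m w : Nat} : (m ||| 2 ^ w).testBit w = true := by
  simp [Nat.testBit_or, Nat.testBit_two_pow]

lemma pv_subset_testBit {A m k : Nat} (h : A ||| m = m) (hA : A.testBit k = true) :
    m.testBit k = true := by
  have := congrArg (fun x => x.testBit k) h
  simp only [Nat.testBit_or] at this
  rw [hA] at this; simpa using this.symm

lemma pv_lt_subset {A n : Nat} (h : A < 2 ^ n) : A ||| (2 ^ n - 1) = 2 ^ n - 1 := by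
  apply Nat.eq_of_testBit_eq
  intro k
  simp only [Nat.testBit_or, Nat.testBit_two_pow_sub_one]
  by_cases hk : k < n
  · simp [hk]
  · have : A.testBit k = false := Nat.testBit_lt_two_pow (lt_of_lt_of_le h (Nat.pow_le_pow_right (by norm_num) (by omega)))
    simp [hk, this]

-- ---- the initial dp table ----
lemma pv_init_aux (n : Nat) : ∀ k, k ≤ n →
    pvShape n ((List.range k).foldl (fun t v => pvTset t (2 ^ v) v 1)
      (List.replicate (2 ^ n) (List.replicate n (0 : Int)))) ∧
    ∀ p q, q < n →
      pvTget ((List.range k).foldl (fun t v => pvTset t (2 ^ v) v 1)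
        (List.replicate (2 ^ n) (List.replicate n (0 : Int)))) p q
      = if p = 2 ^ q ∧ q < k then 1 else 0 := by
  intro k
  induction k with
  | zero =>
    intro _
    refine ⟨pvShape_replicate n, ?_⟩
    intro p q _
    simp [pvTget_replicate]
  | succ k ih =>
    intro hk
    obtain ⟨hsh, hval⟩ := ih (by omega)
    rw [List.range_succ, List.foldl_append, List.foldl_cons, List.foldl_nil]
    have hk' : k < n := by omega
    have h2k : 2 ^ k < 2 ^ n := Nat.pow_lt_pow_right (by norm_num) hk'
    refine ⟨pvShape_tset hsh h2k _ _, ?_⟩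
    intro p q hq
    rw [pvTget_tset hsh h2k hk' _ p q, hval p q hq]
    by_cases hpq : p = 2 ^ q
    · subst hpq
      by_cases hqk : q = k
      · subst hqk; simp
      · have h1 : ¬ ((2:Nat) ^ q = 2 ^ k ∧ q = k) := fun hh => hqk hh.2
        have hiff : q < k + 1 ↔ q < k := by omega
        rw [if_neg h1]
        simp [hiff]
    · have h1 : ¬ (p = 2 ^ k ∧ q = k) := by
        rintro ⟨rfl, rfl⟩; exact hpq rfl
      simp [h1, hpq]

-- ---- DP value functions ----
def pvE (T : List (List Int)) (m v : Nat) : Int :=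
  if h : m.testBit v then
    if m = 2 ^ v then 1
    else ∑ u ∈ Finset.range T.length,
      (if (m ^^^ 2 ^ v).testBit u ∧ pvGet2 T u v ≠ 0 then pvE T (m ^^^ 2 ^ v) u else 0)
  else 0
termination_by m
decreasing_by exact pv_xor_lt h

def pvP (T : List (List Int)) (j : Nat) (m v : Nat) : Int :=
  if h : m.testBit v then
    if m = 2 ^ v then (if v = j then 1 else 0)
    else ∑ u ∈ Finset.range T.length,
      (if (m ^^^ 2 ^ v).testBit u ∧ pvGet2 T u v ≠ 0 then pvP T j (m ^^^ 2 ^ v) u else 0)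
  else 0
termination_by m
decreasing_by exact pv_xor_lt h

def pvU (T : List (List Int)) (i j : Int) (m v : Nat) : Int :=
  if h : m.testBit v then
    if m = 2 ^ v then 0
    else ∑ u ∈ Finset.range T.length,
      (if (m ^^^ 2 ^ v).testBit u ∧ pvGet2 T u v ≠ 0
       then pvU T i j (m ^^^ 2 ^ v) u + (if (u : Int) = i ∧ (v : Int) = j then pvE T (m ^^^ 2 ^ v) u else 0)
       else 0)
  else 0
termination_by m
decreasing_by exact pv_xor_lt h

lemma pvE_single {T : List (List Int)} (v : Nat) : pvE T (2 ^ v) v = 1 := by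
  rw [pvE]; simp [Nat.testBit_two_pow]

lemma pvE_rec {T : List (List Int)} {m v : Nat} (h : m.testBit v = true) (hs : m ≠ 2 ^ v) :
    pvE T m v = ∑ u ∈ Finset.range T.length,
      (if (m ^^^ 2 ^ v).testBit u ∧ pvGet2 T u v ≠ 0 then pvE T (m ^^^ 2 ^ v) u else 0) := by
  rw [pvE]; simp [h, hs]

lemma pvP_notBit {T : List (List Int)} {j m v : Nat} (h : m.testBit v = false) : pvP T j m v = 0 := by
  rw [pvP]; simp [h]

lemma pvP_single {T : List (List Int)} (j v : Nat) : pvP T j (2 ^ v) v = if v = j then 1 else 0 := by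
  rw [pvP]; simp [Nat.testBit_two_pow]

lemma pvP_rec {T : List (List Int)} {j m v : Nat} (h : m.testBit v = true) (hs : m ≠ 2 ^ v) :
    pvP T j m v = ∑ u ∈ Finset.range T.length,
      (if (m ^^^ 2 ^ v).testBit u ∧ pvGet2 T u v ≠ 0 then pvP T j (m ^^^ 2 ^ v) u else 0) := by
  rw [pvP]; simp [h, hs]

lemma pvU_notBit {T : List (List Int)} {i j : Int} {m v : Nat} (h : m.testBit v = false) :
    pvU T i j m v = 0 := by
  rw [pvU]; simp [h]

lemma pvU_single {T : List (List Int)} (i j : Int) (v : Nat) : pvU T i j (2 ^ v) v = 0 := by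
  rw [pvU]; simp [Nat.testBit_two_pow]

lemma pvU_rec {T : List (List Int)} {i j : Int} {m v : Nat} (h : m.testBit v = true) (hs : m ≠ 2 ^ v) :
    pvU T i j m v = ∑ u ∈ Finset.range T.length,
      (if (m ^^^ 2 ^ v).testBit u ∧ pvGet2 T u v ≠ 0
       then pvU T i j (m ^^^ 2 ^ v) u + (if (u : Int) = i ∧ (v : Int) = j then pvE T (m ^^^ 2 ^ v) u else 0)
       else 0) := by
  rw [pvU]; simp [h, hs]

-- a path starting at j needs j in its vertex set
lemma pvP_zero {T : List (List Int)} {j : Nat} :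
    ∀ m, m.testBit j = false → ∀ v, pvP T j m v = 0 := by
  intro m
  induction m using Nat.strong_induction_on with
  | _ m ih =>
    intro hj v
    by_cases hb : m.testBit v
    · by_cases hs : m = 2 ^ v
      · subst hs
        have hvj : ¬ v = j := by
          intro h; subst h; simp [Nat.testBit_two_pow] at hj
        rw [pvP_single, if_neg hvj]
      · rw [pvP_rec hb hs]
        apply Finset.sum_eq_zero
        intro u _
        have hj' : (m ^^^ 2 ^ v).testBit j = false := by
          have hvj : ¬ v = j := by
            intro h; subst h; rw [hb] at hj; cases hj
          simp [Nat.testBit_xor, Nat.testBit_two_pow, hj, hvj]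
        rw [ih _ (pv_xor_lt hb) hj' u]
        simp
    · exact pvP_notBit (by simpa using hb)

-- a path from j to j is the one-vertex path
lemma pvP_self {T : List (List Int)} {j : Nat} :
    ∀ m, pvP T j m j = if m = 2 ^ j then 1 else 0 := by
  intro m
  by_cases hb : m.testBit j
  · by_cases hs : m = 2 ^ j
    · subst hs; simp [pvP_single]
    · rw [pvP_rec hb hs, if_neg hs]
      apply Finset.sum_eq_zero
      intro u _
      have hj' : (m ^^^ 2 ^ j).testBit j = false := by
        simp [Nat.testBit_xor, Nat.testBit_two_pow, hb]
      rw [pvP_zero _ hj' u]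
      simp
  · have hs : ¬ m = 2 ^ j := by
      intro h; subst h; simp [Nat.testBit_two_pow] at hb
    rw [pvP_notBit (by simpa using hb), if_neg hs]

-- ---- A: effect of the inner u-loop ----
lemma pvA_uloop (T : List (List Int)) (i j : Int) (mask v : Nat) (c cu : Int)
    (hmask : mask < 2 ^ T.length) :
    ∀ k, k ≤ T.length → ∀ s : List (List Int) × List (List Int),
    pvShape T.length s.1 → pvShape T.length s.2 →
    pvShape T.length ((List.range k).foldl (fun s u =>
          if mask.testBit u then s
          else if pvGet2 T v u ≠ 0 then
            (pvTadd s.1 (mask ||| 2 ^ u) u c,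
             if (v : Int) = i ∧ (u : Int) = j then pvTadd s.2 (mask ||| 2 ^ u) u (cu + c)
             else pvTadd s.2 (mask ||| 2 ^ u) u cu)
          else s) s).1 ∧
    pvShape T.length ((List.range k).foldl (fun s u =>
          if mask.testBit u then s
          else if pvGet2 T v u ≠ 0 then
            (pvTadd s.1 (mask ||| 2 ^ u) u c,
             if (v : Int) = i ∧ (u : Int) = j then pvTadd s.2 (mask ||| 2 ^ u) u (cu + c)
             else pvTadd s.2 (mask ||| 2 ^ u) u cu)
          else s) s).2 ∧
    ∀ t w, w < T.length →
      (pvTget ((List.range k).foldl (fun s u =>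
          if mask.testBit u then s
          else if pvGet2 T v u ≠ 0 then
            (pvTadd s.1 (mask ||| 2 ^ u) u c,
             if (v : Int) = i ∧ (u : Int) = j then pvTadd s.2 (mask ||| 2 ^ u) u (cu + c)
             else pvTadd s.2 (mask ||| 2 ^ u) u cu)
          else s) s).1 t w = pvTget s.1 t w +
        (if w < k ∧ mask.testBit w = false ∧ pvGet2 T v w ≠ 0 ∧ t = mask ||| 2 ^ w then c else 0)) ∧
      (pvTget ((List.range k).foldl (fun s u =>
          if mask.testBit u then s
          else if pvGet2 T v u ≠ 0 then
            (pvTadd s.1 (mask ||| 2 ^ u) u c,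
             if (v : Int) = i ∧ (u : Int) = j then pvTadd s.2 (mask ||| 2 ^ u) u (cu + c)
             else pvTadd s.2 (mask ||| 2 ^ u) u cu)
          else s) s).2 t w = pvTget s.2 t w +
        (if w < k ∧ mask.testBit w = false ∧ pvGet2 T v w ≠ 0 ∧ t = mask ||| 2 ^ w
         then (if (v : Int) = i ∧ (w : Int) = j then cu + c else cu) else 0)) := by
  intro k
  induction k with
  | zero =>
    intro _ s h1 h2
    refine ⟨h1, h2, ?_⟩
    intro t w _
    simp
  | succ k ih =>
    intro hk s h1 h2
    obtain ⟨r1, r2, hr⟩ := ih (by omega) s h1 h2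
    rw [List.range_succ, List.foldl_append, List.foldl_cons, List.foldl_nil]
    set r := (List.range k).foldl _ s with hrdef
    have hkn : k < T.length := by omega
    have h2k : (2 : Nat) ^ k < 2 ^ T.length := Nat.pow_lt_pow_right (by norm_num) hkn
    have hor : mask ||| 2 ^ k < 2 ^ T.length := Nat.or_lt_two_pow hmask h2k
    by_cases hb : mask.testBit k
    · rw [if_pos hb]
      refine ⟨r1, r2, ?_⟩
      intro t w hw
      obtain ⟨e1, e2⟩ := hr t w hw
      have hiff : (w < k + 1 ∧ mask.testBit w = false ∧ pvGet2 T v w ≠ 0 ∧ t = mask ||| 2 ^ w) ↔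
          (w < k ∧ mask.testBit w = false ∧ pvGet2 T v w ≠ 0 ∧ t = mask ||| 2 ^ w) := by
        constructor
        · rintro ⟨hlt, a, b, c'⟩
          refine ⟨?_, a, b, c'⟩
          rcases Nat.lt_succ_iff_lt_or_eq.1 hlt with h | rfl
          · exact h
          · rw [hb] at a; cases a
        · rintro ⟨hlt, a, b, c'⟩; exact ⟨by omega, a, b, c'⟩
      rw [e1, e2]
      exact ⟨by rw [if_congr hiff rfl rfl], by rw [if_congr hiff rfl rfl]⟩
    · rw [if_neg hb]
      have hbF : mask.testBit k = false := by simpa using hb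
      by_cases hg : pvGet2 T v k ≠ 0
      · rw [if_pos hg]
        constructor
        · exact pvShape_tadd r1 hor k c
        constructor
        · by_cases hij : (v : Int) = i ∧ (k : Int) = j
          · rw [if_pos hij]; exact pvShape_tadd r2 hor k (cu + c)
          · rw [if_neg hij]; exact pvShape_tadd r2 hor k cu
        · intro t w hw
          obtain ⟨e1, e2⟩ := hr t w hw
          have step2 : pvTget (if (v : Int) = i ∧ (k : Int) = j
                then pvTadd r.2 (mask ||| 2 ^ k) k (cu + c)
                else pvTadd r.2 (mask ||| 2 ^ k) k cu) t w
              = pvTget r.2 t w + (if t = mask ||| 2 ^ k ∧ w = k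
                  then (if (v : Int) = i ∧ (w : Int) = j then cu + c else cu) else 0) := by
            by_cases hij : (v : Int) = i ∧ (k : Int) = j
            · rw [if_pos hij, pvTget_tadd r2 hor hkn _ t w]
              by_cases hcase : t = mask ||| 2 ^ k ∧ w = k
              · rw [if_pos hcase, if_pos hcase]
                rw [if_pos (by rw [hcase.2]; exact hij)]
              · rw [if_neg hcase, if_neg hcase]; ring
            · rw [if_neg hij, pvTget_tadd r2 hor hkn _ t w]
              by_cases hcase : t = mask ||| 2 ^ k ∧ w = k
              · rw [if_pos hcase, if_pos hcase]
                rw [if_neg (by rw [hcase.2]; exact hij)]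
              · rw [if_neg hcase, if_neg hcase]; ring
          constructor
          · rw [pvTget_tadd r1 hor hkn c t w, e1]
            by_cases hcase : t = mask ||| 2 ^ k ∧ w = k
            · rw [if_pos hcase]
              have hnot : ¬ (w < k ∧ mask.testBit w = false ∧ pvGet2 T v w ≠ 0 ∧
                  t = mask ||| 2 ^ w) := by rintro ⟨hlt, _⟩; omega
              have hyes : (w < k + 1 ∧ mask.testBit w = false ∧ pvGet2 T v w ≠ 0 ∧
                  t = mask ||| 2 ^ w) := by
                refine ⟨by omega, ?_, ?_, ?_⟩ <;> rw [hcase.2] <;> [exact hbF; exact hg; exact hcase.1]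
              rw [if_neg hnot, if_pos hyes]
              ring
            · rw [if_neg hcase]
              have hiff : (w < k + 1 ∧ mask.testBit w = false ∧ pvGet2 T v w ≠ 0 ∧ t = mask ||| 2 ^ w) ↔
                  (w < k ∧ mask.testBit w = false ∧ pvGet2 T v w ≠ 0 ∧ t = mask ||| 2 ^ w) := by
                constructor
                · rintro ⟨hlt, a, b, c'⟩
                  refine ⟨?_, a, b, c'⟩
                  rcases Nat.lt_succ_iff_lt_or_eq.1 hlt with h | rfl
                  · exact h
                  · exact absurd ⟨c', rfl⟩ hcase
                · rintro ⟨hlt, a, b, c'⟩; exact ⟨by omega, a, b, c'⟩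
              rw [if_congr hiff rfl rfl]
          · rw [step2, e2]
            by_cases hcase : t = mask ||| 2 ^ k ∧ w = k
            · rw [if_pos hcase]
              have hnot : ¬ (w < k ∧ mask.testBit w = false ∧ pvGet2 T v w ≠ 0 ∧
                  t = mask ||| 2 ^ w) := by rintro ⟨hlt, _⟩; omega
              have hyes : (w < k + 1 ∧ mask.testBit w = false ∧ pvGet2 T v w ≠ 0 ∧
                  t = mask ||| 2 ^ w) := by
                refine ⟨by omega, ?_, ?_, ?_⟩ <;> rw [hcase.2] <;> [exact hbF; exact hg; exact hcase.1]
              rw [if_neg hnot, if_pos hyes]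
              ring
            · rw [if_neg hcase]
              have hiff : (w < k + 1 ∧ mask.testBit w = false ∧ pvGet2 T v w ≠ 0 ∧ t = mask ||| 2 ^ w) ↔
                  (w < k ∧ mask.testBit w = false ∧ pvGet2 T v w ≠ 0 ∧ t = mask ||| 2 ^ w) := by
                constructor
                · rintro ⟨hlt, a, b, c'⟩
                  refine ⟨?_, a, b, c'⟩
                  rcases Nat.lt_succ_iff_lt_or_eq.1 hlt with h | rfl
                  · exact h
                  · exact absurd ⟨c', rfl⟩ hcase
                · rintro ⟨hlt, a, b, c'⟩; exact ⟨by omega, a, b, c'⟩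
              rw [if_congr hiff rfl rfl]
              ring
      · rw [if_neg hg]
        rw [not_not] at hg
        refine ⟨r1, r2, ?_⟩
        intro t w hw
        obtain ⟨e1, e2⟩ := hr t w hw
        have hiff : ∀ (X : Prop), ((w < k + 1 ∧ mask.testBit w = false ∧ pvGet2 T v w ≠ 0 ∧ X) ↔
            (w < k ∧ mask.testBit w = false ∧ pvGet2 T v w ≠ 0 ∧ X)) := by
          intro X
          constructor
          · rintro ⟨hlt, a, b, c'⟩
            refine ⟨?_, a, b, c'⟩
            rcases Nat.lt_succ_iff_lt_or_eq.1 hlt with h | rfl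
            · exact h
            · exact absurd hg b
          · rintro ⟨hlt, a, b, c'⟩; exact ⟨by omega, a, b, c'⟩
        rw [e1, e2]
        exact ⟨by rw [if_congr (hiff _) rfl rfl], by rw [if_congr (hiff _) rfl rfl]⟩

-- ---- A: effect of one whole mask iteration (the v-loop) ----
lemma pvA_vloop (T : List (List Int)) (i j : Int) (mask : Nat)
    (hmask : mask < 2 ^ T.length) :
    ∀ k, k ≤ T.length → ∀ s : List (List Int) × List (List Int),
    pvShape T.length s.1 → pvShape T.length s.2 →
    ∀ R, R = (List.range k).foldl (fun s v =>
        if ¬ mask.testBit v then s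
        else
          let c := pvTget s.1 mask v
          let cu := pvTget s.2 mask v
          if c = 0 ∧ cu = 0 then s
          else
            (List.range T.length).foldl (fun s u =>
              if mask.testBit u then s
              else if pvGet2 T v u ≠ 0 then
                (pvTadd s.1 (mask ||| 2 ^ u) u c,
                 if (v : Int) = i ∧ (u : Int) = j then pvTadd s.2 (mask ||| 2 ^ u) u (cu + c)
                 else pvTadd s.2 (mask ||| 2 ^ u) u cu)
              else s) s) s →
    pvShape T.length R.1 ∧ pvShape T.length R.2 ∧
    ∀ t w, w < T.length →
      (pvTget R.1 t w = pvTget s.1 t w + (if mask.testBit w = false ∧ t = mask ||| 2 ^ w then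
          ∑ v ∈ Finset.range k, (if mask.testBit v ∧ pvGet2 T v w ≠ 0 then pvTget s.1 mask v else 0) else 0)) ∧
      (pvTget R.2 t w = pvTget s.2 t w + (if mask.testBit w = false ∧ t = mask ||| 2 ^ w then
          ∑ v ∈ Finset.range k, (if mask.testBit v ∧ pvGet2 T v w ≠ 0 then
            (if (v : Int) = i ∧ (w : Int) = j then pvTget s.2 mask v + pvTget s.1 mask v
             else pvTget s.2 mask v) else 0) else 0)) := by
  intro k
  induction k with
  | zero =>
    intro _ s h1 h2 R hR
    subst hR
    refine ⟨h1, h2, ?_⟩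
    intro t w _
    simp
  | succ k ih =>
    intro hk s h1 h2 R hR
    obtain ⟨r1, r2, hr⟩ := ih (by omega) s h1 h2 _ rfl
    subst hR
    rw [List.range_succ, List.foldl_append, List.foldl_cons, List.foldl_nil]
    have hkn : k < T.length := by omega
    set Rk := (List.range k).foldl (fun s v =>
        if ¬ mask.testBit v then s
        else
          let c := pvTget s.1 mask v
          let cu := pvTget s.2 mask v
          if c = 0 ∧ cu = 0 then s
          else
            (List.range T.length).foldl (fun s u =>
              if mask.testBit u then s
              else if pvGet2 T v u ≠ 0 then
                (pvTadd s.1 (mask ||| 2 ^ u) u c,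
                 if (v : Int) = i ∧ (u : Int) = j then pvTadd s.2 (mask ||| 2 ^ u) u (cu + c)
                 else pvTadd s.2 (mask ||| 2 ^ u) u cu)
              else s) s) s with hRk
    have hnotself : ∀ q : Nat, ¬ (mask.testBit q = false ∧ mask = mask ||| 2 ^ q) := by
      rintro q ⟨hf, heq⟩
      have hb := pv_testBit_or_self (m := mask) (w := q)
      rw [← heq] at hb
      rw [hb] at hf; cases hf
    have hstab1 : ∀ q, q < T.length → pvTget Rk.1 mask q = pvTget s.1 mask q := by
      intro q hq
      rw [(hr mask q hq).1, if_neg (hnotself q), add_zero]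
    have hstab2 : ∀ q, q < T.length → pvTget Rk.2 mask q = pvTget s.2 mask q := by
      intro q hq
      rw [(hr mask q hq).2, if_neg (hnotself q), add_zero]
    by_cases hbt : mask.testBit k
    · rw [if_neg (by simp [hbt])]
      simp only []
      by_cases hskip : pvTget Rk.1 mask k = 0 ∧ pvTget Rk.2 mask k = 0
      · rw [if_pos hskip]
        refine ⟨r1, r2, ?_⟩
        intro t w hw
        obtain ⟨e1, e2⟩ := hr t w hw
        have hz1 : pvTget s.1 mask k = 0 := by rw [← hstab1 k hkn]; exact hskip.1
        have hz2 : pvTget s.2 mask k = 0 := by rw [← hstab2 k hkn]; exact hskip.2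
        rw [e1, e2]
        constructor
        · congr 1
          by_cases hC : mask.testBit w = false ∧ t = mask ||| 2 ^ w
          · rw [if_pos hC, if_pos hC, Finset.sum_range_succ, hz1]
            simp
          · rw [if_neg hC, if_neg hC]
        · congr 1
          by_cases hC : mask.testBit w = false ∧ t = mask ||| 2 ^ w
          · rw [if_pos hC, if_pos hC, Finset.sum_range_succ, hz1, hz2]
            simp
          · rw [if_neg hC, if_neg hC]
      · rw [if_neg hskip]
        obtain ⟨u1, u2, hu⟩ := pvA_uloop T i j mask k (pvTget Rk.1 mask k) (pvTget Rk.2 mask k)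
          hmask T.length le_rfl Rk r1 r2
        refine ⟨u1, u2, ?_⟩
        intro t w hw
        obtain ⟨f1, f2⟩ := hu t w hw
        obtain ⟨e1, e2⟩ := hr t w hw
        constructor
        · rw [f1, e1, hstab1 k hkn]
          by_cases hC : mask.testBit w = false ∧ t = mask ||| 2 ^ w
          · have hA : (w < T.length ∧ mask.testBit w = false ∧ pvGet2 T k w ≠ 0 ∧ t = mask ||| 2 ^ w)
                ↔ (pvGet2 T k w ≠ 0) := by
              constructor
              · rintro ⟨_, _, h, _⟩; exact h
              · intro h; exact ⟨hw, hC.1, h, hC.2⟩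
            have hB : (mask.testBit k = true ∧ pvGet2 T k w ≠ 0) ↔ (pvGet2 T k w ≠ 0) := by
              constructor
              · rintro ⟨_, h⟩; exact h
              · intro h; exact ⟨hbt, h⟩
            rw [if_pos hC, if_pos hC, Finset.sum_range_succ,
               if_congr hA rfl rfl, if_congr hB rfl rfl]
            by_cases hgw : pvGet2 T k w ≠ 0
            · rw [if_pos hgw]; ring
            · rw [if_neg hgw]; ring
          · rw [if_neg hC, if_neg hC,
               if_neg (by rintro ⟨_, a, b, c'⟩; exact hC ⟨a, c'⟩), add_zero, add_zero]
        · rw [f2, e2, hstab1 k hkn, hstab2 k hkn]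
          by_cases hC : mask.testBit w = false ∧ t = mask ||| 2 ^ w
          · have hA : (w < T.length ∧ mask.testBit w = false ∧ pvGet2 T k w ≠ 0 ∧ t = mask ||| 2 ^ w)
                ↔ (pvGet2 T k w ≠ 0) := by
              constructor
              · rintro ⟨_, _, h, _⟩; exact h
              · intro h; exact ⟨hw, hC.1, h, hC.2⟩
            have hB : (mask.testBit k = true ∧ pvGet2 T k w ≠ 0) ↔ (pvGet2 T k w ≠ 0) := by
              constructor
              · rintro ⟨_, h⟩; exact h
              · intro h; exact ⟨hbt, h⟩
            rw [if_pos hC, if_pos hC, Finset.sum_range_succ,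
               if_congr hA rfl rfl, if_congr hB rfl rfl]
            by_cases hgw : pvGet2 T k w ≠ 0
            · rw [if_pos hgw]; ring
            · rw [if_neg hgw]; ring
          · rw [if_neg hC, if_neg hC,
               if_neg (by rintro ⟨_, a, b, c'⟩; exact hC ⟨a, c'⟩), add_zero, add_zero]
    · rw [if_pos (by simp [hbt])]
      refine ⟨r1, r2, ?_⟩
      intro t w hw
      obtain ⟨e1, e2⟩ := hr t w hw
      have hbF : mask.testBit k = false := by simpa using hbt
      rw [e1, e2]
      constructor
      · congr 1
        by_cases hC : mask.testBit w = false ∧ t = mask ||| 2 ^ w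
        · rw [if_pos hC, if_pos hC, Finset.sum_range_succ,
             if_neg (by rintro ⟨a, _⟩; rw [hbF] at a; cases a), add_zero]
        · rw [if_neg hC, if_neg hC]
      · congr 1
        by_cases hC : mask.testBit w = false ∧ t = mask ||| 2 ^ w
        · rw [if_pos hC, if_pos hC, Finset.sum_range_succ,
             if_neg (by rintro ⟨a, _⟩; rw [hbF] at a; cases a), add_zero]
        · rw [if_neg hC, if_neg hC]

-- ---- A: the main-loop invariant ----
def pvInvA (T : List (List Int)) (i j : Int) (m : Nat)
    (s : List (List Int) × List (List Int)) : Prop :=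
  pvShape T.length s.1 ∧ pvShape T.length s.2 ∧
  ∀ t w, t < 2 ^ T.length → w < T.length →
    (pvTget s.1 t w = if t.testBit w ∧ (t = 2 ^ w ∨ t ^^^ 2 ^ w < m) then pvE T t w else 0) ∧
    (pvTget s.2 t w = if t.testBit w ∧ (t = 2 ^ w ∨ t ^^^ 2 ^ w < m) then pvU T i j t w else 0)

lemma pvInvA_step (T : List (List Int)) (i j : Int) (m : Nat)
    (hm1 : 1 ≤ m) (hm : m < 2 ^ T.length) (s : List (List Int) × List (List Int))
    (h : pvInvA T i j m s) : pvInvA T i j (m + 1) (pvAstep T i j m s) := by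
  obtain ⟨h1, h2, hval⟩ := h
  obtain ⟨r1, r2, hr⟩ := pvA_vloop T i j m hm T.length le_rfl s h1 h2 (pvAstep T i j m s)
    (by rw [pvAstep])
  refine ⟨r1, r2, ?_⟩
  intro t w ht hw
  obtain ⟨f1, f2⟩ := hr t w hw
  have hsum1 : ∀ w', (∑ v ∈ Finset.range T.length,
      (if m.testBit v ∧ pvGet2 T v w' ≠ 0 then pvTget s.1 m v else 0)) =
      ∑ v ∈ Finset.range T.length,
      (if m.testBit v ∧ pvGet2 T v w' ≠ 0 then pvE T m v else 0) := by
    intro w'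
    apply Finset.sum_congr rfl
    intro v hv
    by_cases hc : m.testBit v ∧ pvGet2 T v w' ≠ 0
    · have hdisj : m = 2 ^ v ∨ m ^^^ 2 ^ v < m := by
        by_cases hms : m = 2 ^ v
        · exact Or.inl hms
        · exact Or.inr (pv_xor_lt hc.1)
      have g1 : pvTget s.1 m v = pvE T m v := by
        rw [(hval m v hm (Finset.mem_range.1 hv)).1, if_pos ⟨hc.1, hdisj⟩]
      rw [if_pos hc, if_pos hc, g1]
    · rw [if_neg hc, if_neg hc]
  have hsum2 : ∀ w', (∑ v ∈ Finset.range T.length,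
      (if m.testBit v ∧ pvGet2 T v w' ≠ 0 then
        (if (v : Int) = i ∧ (w' : Int) = j then pvTget s.2 m v + pvTget s.1 m v
         else pvTget s.2 m v) else 0)) =
      ∑ v ∈ Finset.range T.length,
      (if m.testBit v ∧ pvGet2 T v w' ≠ 0 then
        pvU T i j m v + (if (v : Int) = i ∧ (w' : Int) = j then pvE T m v else 0) else 0) := by
    intro w'
    apply Finset.sum_congr rfl
    intro v hv
    by_cases hc : m.testBit v ∧ pvGet2 T v w' ≠ 0
    · have hdisj : m = 2 ^ v ∨ m ^^^ 2 ^ v < m := by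
        by_cases hms : m = 2 ^ v
        · exact Or.inl hms
        · exact Or.inr (pv_xor_lt hc.1)
      have g1 : pvTget s.1 m v = pvE T m v := by
        rw [(hval m v hm (Finset.mem_range.1 hv)).1, if_pos ⟨hc.1, hdisj⟩]
      have g2 : pvTget s.2 m v = pvU T i j m v := by
        rw [(hval m v hm (Finset.mem_range.1 hv)).2, if_pos ⟨hc.1, hdisj⟩]
      rw [if_pos hc, if_pos hc, g1, g2]
      by_cases hij : (v : Int) = i ∧ (w' : Int) = j
      · rw [if_pos hij, if_pos hij]
      · rw [if_neg hij, if_neg hij]; ring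
    · rw [if_neg hc, if_neg hc]
  obtain ⟨e1, e2⟩ := hval t w ht hw
  by_cases hD : m.testBit w = false ∧ t = m ||| 2 ^ w
  · have hxor : t ^^^ 2 ^ w = m := by rw [hD.2]; exact pv_or_xor hD.1
    have htb : t.testBit w = true := by rw [hD.2]; exact pv_testBit_or_self
    have hts : t ≠ 2 ^ w := by
      intro hteq
      have : m = 0 := by
        have := hxor
        rw [hteq] at this
        simpa using this.symm
      omega
    have hXold : ¬ (t.testBit w ∧ (t = 2 ^ w ∨ t ^^^ 2 ^ w < m)) := by
      rintro ⟨_, hor | hlt⟩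
      · exact hts hor
      · rw [hxor] at hlt; omega
    have hXnew : t.testBit w ∧ (t = 2 ^ w ∨ t ^^^ 2 ^ w < m + 1) := by
      exact ⟨htb, Or.inr (by rw [hxor]; omega)⟩
    constructor
    · rw [f1, e1, if_neg hXold, if_pos hD, if_pos hXnew, hsum1 w, zero_add,
         pvE_rec htb hts, hxor]
    · rw [f2, e2, if_neg hXold, if_pos hD, if_pos hXnew, hsum2 w, zero_add,
         pvU_rec htb hts, hxor]
  · have hXiff : (t.testBit w ∧ (t = 2 ^ w ∨ t ^^^ 2 ^ w < m + 1)) ↔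
        (t.testBit w ∧ (t = 2 ^ w ∨ t ^^^ 2 ^ w < m)) := by
      constructor
      · rintro ⟨hb, hor | hlt⟩
        · exact ⟨hb, Or.inl hor⟩
        · rcases Nat.lt_succ_iff_lt_or_eq.1 hlt with h' | heq
          · exact ⟨hb, Or.inr h'⟩
          · exfalso
            apply hD
            constructor
            · have := pv_testBit_xor_self (m := t) (v := w)
              rw [heq, hb] at this
              simpa using this
            · rw [← heq]; exact (pv_xor_or hb).symm
      · rintro ⟨hb, hor | hlt⟩
        · exact ⟨hb, Or.inl hor⟩
        · exact ⟨hb, Or.inr (by omega)⟩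
    constructor
    · rw [f1, e1, if_neg hD, add_zero, if_congr hXiff rfl rfl]
    · rw [f2, e2, if_neg hD, add_zero, if_congr hXiff rfl rfl]

-- ---- A: final characterization ----
lemma pvA_value (T : List (List Int)) (i j : Int) (hg : ¬ pvArc T i j = 0) :
    paths_using_arc T i j = ∑ v ∈ Finset.range T.length, pvU T i j (2 ^ T.length - 1) v := by
  simp only [paths_using_arc]
  rw [if_neg hg]
  obtain ⟨hsh0, hent0⟩ := pv_init_aux T.length T.length le_rfl
  have h0 : pvInvA T i j 1
      ((List.range T.length).foldl (fun t v => pvTset t (2 ^ v) v 1)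
        (List.replicate (2 ^ T.length) (List.replicate T.length (0 : Int))),
       List.replicate (2 ^ T.length) (List.replicate T.length (0 : Int))) := by
    refine ⟨hsh0, pvShape_replicate T.length, ?_⟩
    intro t w ht hw
    have hcond : (t.testBit w ∧ (t = 2 ^ w ∨ t ^^^ 2 ^ w < 1)) ↔ (t = 2 ^ w ∧ w < T.length) := by
      constructor
      · rintro ⟨hb, hor | hlt⟩
        · exact ⟨hor, hw⟩
        · refine ⟨?_, hw⟩
          have hx0 : t ^^^ 2 ^ w = 0 := by omega
          have := pv_xor_or hb
          rw [hx0] at this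
          simpa using this.symm
      · rintro ⟨rfl, _⟩
        exact ⟨by simp [Nat.testBit_two_pow], Or.inl rfl⟩
    constructor
    · rw [hent0 t w hw]
      by_cases hc : t = 2 ^ w ∧ w < T.length
      · rw [if_pos hc, if_pos (hcond.2 hc), hc.1, pvE_single]
      · rw [if_neg hc, if_neg (fun hh => hc (hcond.1 hh))]
    · rw [pvTget_replicate t w]
      by_cases hc : t.testBit w ∧ (t = 2 ^ w ∨ t ^^^ 2 ^ w < 1)
      · rw [if_pos hc, (hcond.1 hc).1, pvU_single]
      · rw [if_neg hc]
  have hstep : ∀ m s', 1 ≤ m → m < 1 + (2 ^ T.length - 1) → pvInvA T i j m s' →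
      pvInvA T i j (m + 1) ((fun s mask => pvAstep T i j mask s) s' m) := by
    intro m s' hm1 hm2 hI
    exact pvInvA_step T i j m hm1 (by have := Nat.one_le_two_pow (n := T.length); omega) s' hI
  have hfold := pv_foldl_range'_inv (fun s mask => pvAstep T i j mask s) (pvInvA T i j)
    (2 ^ T.length - 1) 1 _ hstep h0
  rw [pv_drop_one_range]
  have h1 : 1 + (2 ^ T.length - 1) = 2 ^ T.length := by
    have := Nat.one_le_two_pow (n := T.length); omega
  rw [h1] at hfold
  obtain ⟨_, _, hval⟩ := hfold
  rw [pv_foldl_sum, zero_add]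
  apply Finset.sum_congr rfl
  intro v hv
  have hvn : v < T.length := Finset.mem_range.1 hv
  have hfull : 2 ^ T.length - 1 < 2 ^ T.length := by
    have := Nat.one_le_two_pow (n := T.length); omega
  have htb : (2 ^ T.length - 1).testBit v = true := by
    rw [Nat.testBit_two_pow_sub_one]; simpa using hvn
  have h2v : (2 : Nat) ^ v < 2 ^ T.length := Nat.pow_lt_pow_right (by norm_num) hvn
  rw [(hval (2 ^ T.length - 1) v hfull hvn).2,
     if_pos ⟨htb, Or.inr (Nat.xor_lt_two_pow hfull h2v)⟩]

-- ---- B: sum helpers ----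
lemma pv_foldl_pairsum (C : Nat → Prop) [DecidablePred C] (f g : Nat → Int) (k : Nat) :
    ∀ a b : Int, (List.range k).foldl
      (fun (p : Int × Int) u => if C u then (p.1 + f u, p.2 + g u) else p) (a, b) =
    (a + ∑ u ∈ Finset.range k, (if C u then f u else 0),
     b + ∑ u ∈ Finset.range k, (if C u then g u else 0)) := by
  induction k with
  | zero => intro a b; simp
  | succ k ih =>
    intro a b
    rw [List.range_succ, List.foldl_append, List.foldl_cons, List.foldl_nil, ih a b]
    by_cases hc : C k
    · rw [if_pos hc]
      simp only [Finset.sum_range_succ, if_pos hc, Prod.mk.injEq]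
      constructor <;> ring
    · rw [if_neg hc]
      simp only [Finset.sum_range_succ, if_neg hc]
      simp

lemma pv_foldl_sum_if (C : Nat → Prop) [DecidablePred C] (f : Nat → Int) (k : Nat) (a : Int) :
    (List.range k).foldl (fun acc v => if C v then acc + f v else acc) a =
    a + ∑ v ∈ Finset.range k, (if C v then f v else 0) := by
  induction k generalizing a with
  | zero => simp
  | succ k ih =>
    rw [List.range_succ, List.foldl_append, List.foldl_cons, List.foldl_nil, ih a,
       Finset.sum_range_succ]
    by_cases hc : C k
    · rw [if_pos hc, if_pos hc]; ring
    · rw [if_neg hc, if_neg hc]; ring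

-- ---- B: the v-loop of one mask iteration ----
lemma pvB_vloop (T : List (List Int)) (jn : Nat) (mask : Nat)
    (hmask : mask < 2 ^ T.length) (hm1 : 1 ≤ mask)
    (s : List (List Int) × List (List Int))
    (hI : pvShape T.length s.1 ∧ pvShape T.length s.2 ∧
      ∀ t w, t < 2 ^ T.length → w < T.length →
        (pvTget s.1 t w = if t.testBit w ∧ (t = 2 ^ w ∨ t < mask) then pvE T t w else 0) ∧
        (pvTget s.2 t w = if t.testBit w ∧ (t = 2 ^ w ∨ t < mask) then pvP T jn t w else 0)) :
    ∀ k, k ≤ T.length →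
    pvShape T.length ((List.range k).foldl (fun s v =>
        if ¬ mask.testBit v ∨ mask = 2 ^ v then s
        else
          let rest := mask ^^^ 2 ^ v
          let p := (List.range T.length).foldl (fun (p : Int × Int) u =>
              if rest.testBit u ∧ pvGet2 T u v ≠ 0 then
                (p.1 + pvTget s.1 rest u, p.2 + pvTget s.2 rest u)
              else p) ((0 : Int), (0 : Int))
          (pvTset s.1 mask v p.1, pvTset s.2 mask v p.2)) s).1 ∧
    pvShape T.length ((List.range k).foldl (fun s v =>
        if ¬ mask.testBit v ∨ mask = 2 ^ v then s
        else
          let rest := mask ^^^ 2 ^ v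
          let p := (List.range T.length).foldl (fun (p : Int × Int) u =>
              if rest.testBit u ∧ pvGet2 T u v ≠ 0 then
                (p.1 + pvTget s.1 rest u, p.2 + pvTget s.2 rest u)
              else p) ((0 : Int), (0 : Int))
          (pvTset s.1 mask v p.1, pvTset s.2 mask v p.2)) s).2 ∧
    ∀ t w, t < 2 ^ T.length → w < T.length →
      (pvTget ((List.range k).foldl (fun s v =>
        if ¬ mask.testBit v ∨ mask = 2 ^ v then s
        else
          let rest := mask ^^^ 2 ^ v
          let p := (List.range T.length).foldl (fun (p : Int × Int) u =>
              if rest.testBit u ∧ pvGet2 T u v ≠ 0 then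
                (p.1 + pvTget s.1 rest u, p.2 + pvTget s.2 rest u)
              else p) ((0 : Int), (0 : Int))
          (pvTset s.1 mask v p.1, pvTset s.2 mask v p.2)) s).1 t w =
        if t = mask ∧ w < k ∧ mask.testBit w ∧ mask ≠ 2 ^ w then pvE T mask w
        else pvTget s.1 t w) ∧
      (pvTget ((List.range k).foldl (fun s v =>
        if ¬ mask.testBit v ∨ mask = 2 ^ v then s
        else
          let rest := mask ^^^ 2 ^ v
          let p := (List.range T.length).foldl (fun (p : Int × Int) u =>
              if rest.testBit u ∧ pvGet2 T u v ≠ 0 then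
                (p.1 + pvTget s.1 rest u, p.2 + pvTget s.2 rest u)
              else p) ((0 : Int), (0 : Int))
          (pvTset s.1 mask v p.1, pvTset s.2 mask v p.2)) s).2 t w =
        if t = mask ∧ w < k ∧ mask.testBit w ∧ mask ≠ 2 ^ w then pvP T jn mask w
        else pvTget s.2 t w) := by
  obtain ⟨h1, h2, hval⟩ := hI
  intro k
  induction k with
  | zero =>
    intro _
    refine ⟨by simpa using h1, by simpa using h2, ?_⟩
    intro t w _ _
    constructor <;> · rw [if_neg (by rintro ⟨_, hlt, _⟩; omega)]; simp
  | succ k ih =>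
    intro hk
    obtain ⟨r1, r2, hr⟩ := ih (by omega)
    rw [List.range_succ, List.foldl_append, List.foldl_cons, List.foldl_nil]
    have hkn : k < T.length := by omega
    by_cases hskip : ¬ mask.testBit k ∨ mask = 2 ^ k
    · rw [if_pos hskip]
      refine ⟨r1, r2, ?_⟩
      intro t w ht hw
      obtain ⟨e1, e2⟩ := hr t w ht hw
      have hcc : ∀ X : Prop, ((t = mask ∧ w < k + 1 ∧ mask.testBit w ∧ mask ≠ 2 ^ w) ↔
          (t = mask ∧ w < k ∧ mask.testBit w ∧ mask ≠ 2 ^ w)) := by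
        intro _
        constructor
        · rintro ⟨a, hlt, b, c'⟩
          refine ⟨a, ?_, b, c'⟩
          rcases Nat.lt_succ_iff_lt_or_eq.1 hlt with h' | rfl
          · exact h'
          · exact absurd (by tauto : ¬ mask.testBit w ∨ mask = 2 ^ w) (by tauto)
        · rintro ⟨a, hlt, b, c'⟩; exact ⟨a, by omega, b, c'⟩
      rw [e1, e2]
      exact ⟨by rw [if_congr (hcc True) rfl rfl], by rw [if_congr (hcc True) rfl rfl]⟩
    · rw [if_neg hskip]
      have hbt' : mask.testBit k = true := by
        by_contra h
        exact hskip (Or.inl (by simpa using h))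
      have hns : mask ≠ 2 ^ k := fun h => hskip (Or.inr h)
      simp only []
      set rest := mask ^^^ 2 ^ k with hrest
      have hrestlt : rest < mask := pv_xor_lt hbt'
      set Rk := (List.range k).foldl (fun s v =>
        if ¬ mask.testBit v ∨ mask = 2 ^ v then s
        else
          let rest := mask ^^^ 2 ^ v
          let p := (List.range T.length).foldl (fun (p : Int × Int) u =>
              if rest.testBit u ∧ pvGet2 T u v ≠ 0 then
                (p.1 + pvTget s.1 rest u, p.2 + pvTget s.2 rest u)
              else p) ((0 : Int), (0 : Int))
          (pvTset s.1 mask v p.1, pvTset s.2 mask v p.2)) s with hRk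
      have hstab1 : ∀ q, q < T.length → pvTget Rk.1 rest q = pvTget s.1 rest q := by
        intro q hq
        rw [(hr rest q (by omega) hq).1, if_neg (by rintro ⟨a, _⟩; omega)]
      have hstab2 : ∀ q, q < T.length → pvTget Rk.2 rest q = pvTget s.2 rest q := by
        intro q hq
        rw [(hr rest q (by omega) hq).2, if_neg (by rintro ⟨a, _⟩; omega)]
      rw [pv_foldl_pairsum (fun u => rest.testBit u ∧ pvGet2 T u k ≠ 0)
        (fun u => pvTget Rk.1 rest u) (fun u => pvTget Rk.2 rest u) T.length 0 0]
      have hev : (0 : Int) + (∑ u ∈ Finset.range T.length,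
          (if rest.testBit u ∧ pvGet2 T u k ≠ 0 then pvTget Rk.1 rest u else 0)) =
          pvE T mask k := by
        rw [pvE_rec hbt' hns, zero_add]
        apply Finset.sum_congr rfl
        intro u hu
        by_cases hc : rest.testBit u ∧ pvGet2 T u k ≠ 0
        · rw [if_pos hc, if_pos hc, hstab1 u (Finset.mem_range.1 hu),
             (hval rest u (by omega) (Finset.mem_range.1 hu)).1,
             if_pos ⟨hc.1, Or.inr (by omega)⟩]
        · rw [if_neg hc, if_neg hc]
      have hfv : (0 : Int) + (∑ u ∈ Finset.range T.length,
          (if rest.testBit u ∧ pvGet2 T u k ≠ 0 then pvTget Rk.2 rest u else 0)) =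
          pvP T jn mask k := by
        rw [pvP_rec hbt' hns, zero_add]
        apply Finset.sum_congr rfl
        intro u hu
        by_cases hc : rest.testBit u ∧ pvGet2 T u k ≠ 0
        · rw [if_pos hc, if_pos hc, hstab2 u (Finset.mem_range.1 hu),
             (hval rest u (by omega) (Finset.mem_range.1 hu)).2,
             if_pos ⟨hc.1, Or.inr (by omega)⟩]
        · rw [if_neg hc, if_neg hc]
      rw [hev, hfv]
      refine ⟨pvShape_tset r1 hmask k _, pvShape_tset r2 hmask k _, ?_⟩
      intro t w ht hw
      obtain ⟨e1, e2⟩ := hr t w ht hw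
      rw [pvTget_tset r1 hmask hkn _ t w, pvTget_tset r2 hmask hkn _ t w]
      constructor
      · by_cases hc : t = mask ∧ w = k
        · rw [if_pos hc, if_pos ⟨hc.1, by omega, by rw [hc.2]; exact hbt', by rw [hc.2]; exact hns⟩,
             hc.2]
        · rw [if_neg hc, e1]
          have hcc : (t = mask ∧ w < k + 1 ∧ mask.testBit w ∧ mask ≠ 2 ^ w) ↔
              (t = mask ∧ w < k ∧ mask.testBit w ∧ mask ≠ 2 ^ w) := by
            constructor
            · rintro ⟨a, hlt, b, c'⟩
              refine ⟨a, ?_, b, c'⟩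
              rcases Nat.lt_succ_iff_lt_or_eq.1 hlt with h' | rfl
              · exact h'
              · exact absurd ⟨a, rfl⟩ hc
            · rintro ⟨a, hlt, b, c'⟩; exact ⟨a, by omega, b, c'⟩
          rw [if_congr hcc rfl rfl]
      · by_cases hc : t = mask ∧ w = k
        · rw [if_pos hc, if_pos ⟨hc.1, by omega, by rw [hc.2]; exact hbt', by rw [hc.2]; exact hns⟩,
             hc.2]
        · rw [if_neg hc, e2]
          have hcc : (t = mask ∧ w < k + 1 ∧ mask.testBit w ∧ mask ≠ 2 ^ w) ↔
              (t = mask ∧ w < k ∧ mask.testBit w ∧ mask ≠ 2 ^ w) := by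
            constructor
            · rintro ⟨a, hlt, b, c'⟩
              refine ⟨a, ?_, b, c'⟩
              rcases Nat.lt_succ_iff_lt_or_eq.1 hlt with h' | rfl
              · exact h'
              · exact absurd ⟨a, rfl⟩ hc
            · rintro ⟨a, hlt, b, c'⟩; exact ⟨a, by omega, b, c'⟩
          rw [if_congr hcc rfl rfl]

-- ---- B: the main-loop invariant and final characterization ----
def pvInvB (T : List (List Int)) (jn : Nat) (m : Nat)
    (s : List (List Int) × List (List Int)) : Prop :=
  pvShape T.length s.1 ∧ pvShape T.length s.2 ∧
  ∀ t w, t < 2 ^ T.length → w < T.length →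
    (pvTget s.1 t w = if t.testBit w ∧ (t = 2 ^ w ∨ t < m) then pvE T t w else 0) ∧
    (pvTget s.2 t w = if t.testBit w ∧ (t = 2 ^ w ∨ t < m) then pvP T jn t w else 0)

lemma pvInvB_step (T : List (List Int)) (jn : Nat) (m : Nat)
    (hm1 : 1 ≤ m) (hm : m < 2 ^ T.length) (s : List (List Int) × List (List Int))
    (h : pvInvB T jn m s) : pvInvB T jn (m + 1) (pvBstep T m s) := by
  obtain ⟨v1, v2, hv⟩ := pvB_vloop T jn m hm hm1 s h T.length le_rfl
  refine ⟨by rw [pvBstep]; exact v1, by rw [pvBstep]; exact v2, ?_⟩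
  intro t w ht hw
  obtain ⟨f1, f2⟩ := hv t w ht hw
  obtain ⟨_, _, hval⟩ := h
  obtain ⟨e1, e2⟩ := hval t w ht hw
  rw [pvBstep]
  constructor
  · rw [f1]
    by_cases hc : t = m ∧ w < T.length ∧ m.testBit w ∧ m ≠ 2 ^ w
    · rw [if_pos hc, if_pos ⟨by rw [hc.1]; exact hc.2.2.1, Or.inr (by rw [hc.1]; omega)⟩, hc.1]
    · rw [if_neg hc, e1]
      apply if_congr _ rfl rfl
      constructor
      · rintro ⟨hb, hor | hlt⟩
        · exact ⟨hb, Or.inl hor⟩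
        · exact ⟨hb, Or.inr (by omega)⟩
      · rintro ⟨hb, hor | hlt⟩
        · exact ⟨hb, Or.inl hor⟩
        · rcases (by omega : t < m ∨ t = m) with h' | rfl
          · exact ⟨hb, Or.inr h'⟩
          · by_cases hsing : t = 2 ^ w
            · exact ⟨hb, Or.inl hsing⟩
            · exact absurd ⟨rfl, hw, hb, fun hh => hsing hh⟩ hc
  · rw [f2]
    by_cases hc : t = m ∧ w < T.length ∧ m.testBit w ∧ m ≠ 2 ^ w
    · rw [if_pos hc, if_pos ⟨by rw [hc.1]; exact hc.2.2.1, Or.inr (by rw [hc.1]; omega)⟩, hc.1]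
    · rw [if_neg hc, e2]
      apply if_congr _ rfl rfl
      constructor
      · rintro ⟨hb, hor | hlt⟩
        · exact ⟨hb, Or.inl hor⟩
        · exact ⟨hb, Or.inr (by omega)⟩
      · rintro ⟨hb, hor | hlt⟩
        · exact ⟨hb, Or.inl hor⟩
        · rcases (by omega : t < m ∨ t = m) with h' | rfl
          · exact ⟨hb, Or.inr h'⟩
          · by_cases hsing : t = 2 ^ w
            · exact ⟨hb, Or.inl hsing⟩
            · exact absurd ⟨rfl, hw, hb, fun hh => hsing hh⟩ hc

lemma pvB_value (T : List (List Int)) (i j : Int) (hg : ¬ pvArc T i j = 0)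
    (hjn : j.toNat < T.length) :
    paths_using_arc_alt T i j = ∑ A ∈ Finset.range (2 ^ T.length),
      (if A.testBit i.toNat ∧ ¬ A.testBit j.toNat then
        pvE T A i.toNat * (∑ v ∈ Finset.range T.length, pvP T j.toNat ((2 ^ T.length - 1) ^^^ A) v)
       else 0) := by
  simp only [paths_using_arc_alt]
  rw [if_neg hg]
  obtain ⟨hsh0, hent0⟩ := pv_init_aux T.length T.length le_rfl
  have h2j : (2 : Nat) ^ j.toNat < 2 ^ T.length := Nat.pow_lt_pow_right (by norm_num) hjn
  have h0 : pvInvB T j.toNat 1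
      ((List.range T.length).foldl (fun t v => pvTset t (2 ^ v) v 1)
        (List.replicate (2 ^ T.length) (List.replicate T.length (0 : Int))),
       pvTset (List.replicate (2 ^ T.length) (List.replicate T.length (0 : Int)))
         (2 ^ j.toNat) j.toNat 1) := by
    refine ⟨hsh0, pvShape_tset (pvShape_replicate T.length) h2j _ _, ?_⟩
    intro t w ht hw
    have hcond : (t.testBit w ∧ (t = 2 ^ w ∨ t < 1)) ↔ (t = 2 ^ w ∧ w < T.length) := by
      constructor
      · rintro ⟨hb, hor | hlt⟩
        · exact ⟨hor, hw⟩
        · interval_cases t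
          · simp at hb
      · rintro ⟨rfl, _⟩
        exact ⟨by simp [Nat.testBit_two_pow], Or.inl rfl⟩
    constructor
    · rw [hent0 t w hw]
      by_cases hc : t = 2 ^ w ∧ w < T.length
      · rw [if_pos hc, if_pos (hcond.2 hc), hc.1, pvE_single]
      · rw [if_neg hc, if_neg (fun hh => hc (hcond.1 hh))]
    · rw [pvTget_tset (pvShape_replicate T.length) h2j hjn 1 t w, pvTget_replicate t w]
      by_cases hc : t.testBit w ∧ (t = 2 ^ w ∨ t < 1)
      · obtain ⟨hts, _⟩ := hcond.1 hc
        rw [if_pos hc, hts, pvP_single]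
        by_cases hwj : w = j.toNat
        · rw [if_pos hwj, if_pos ⟨by simp [hts, hwj], hwj⟩]
        · rw [if_neg hwj, if_neg (by rintro ⟨_, hh⟩; exact hwj hh)]
      · rw [if_neg hc]
        by_cases hc2 : t = 2 ^ j.toNat ∧ w = j.toNat
        · exfalso
          apply hc
          refine ⟨?_, Or.inl (by rw [hc2.1, hc2.2])⟩
          rw [hc2.1, hc2.2]
          simp [Nat.testBit_two_pow]
        · rw [if_neg hc2]
  have hstep : ∀ m s', 1 ≤ m → m < 1 + (2 ^ T.length - 1) → pvInvB T j.toNat m s' →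
      pvInvB T j.toNat (m + 1) ((fun s mask => pvBstep T mask s) s' m) := by
    intro m s' hm1 hm2 hI
    exact pvInvB_step T j.toNat m hm1 (by have := Nat.one_le_two_pow (n := T.length); omega) s' hI
  have hfold := pv_foldl_range'_inv (fun s mask => pvBstep T mask s) (pvInvB T j.toNat)
    (2 ^ T.length - 1) 1 _ hstep h0
  rw [pv_drop_one_range]
  have h1 : 1 + (2 ^ T.length - 1) = 2 ^ T.length := by
    have := Nat.one_le_two_pow (n := T.length); omega
  rw [h1] at hfold
  obtain ⟨_, _, hval⟩ := hfold
  rw [pv_foldl_sum_if (fun A => A.testBit i.toNat ∧ ¬ A.testBit j.toNat) _ (2 ^ T.length) 0,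
     zero_add]
  apply Finset.sum_congr rfl
  intro A hA
  have hAlt : A < 2 ^ T.length := Finset.mem_range.1 hA
  by_cases hc : A.testBit i.toNat ∧ ¬ A.testBit j.toNat
  · rw [if_pos hc, if_pos hc]
    have hin : i.toNat < T.length := by
      by_contra h
      have : A.testBit i.toNat = false :=
        Nat.testBit_lt_two_pow (lt_of_lt_of_le hAlt (Nat.pow_le_pow_right (by norm_num) (by omega)))
      rw [this] at hc
      exact absurd hc.1 (by simp)
    have hB : (2 ^ T.length - 1) ^^^ A < 2 ^ T.length := by
      have hfull : 2 ^ T.length - 1 < 2 ^ T.length := by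
        have := Nat.one_le_two_pow (n := T.length); omega
      exact Nat.xor_lt_two_pow hfull hAlt
    have hge : pvTget ((List.range' 1 (2 ^ T.length - 1)).foldl (fun s mask => pvBstep T mask s)
        ((List.range T.length).foldl (fun t v => pvTset t (2 ^ v) v 1)
          (List.replicate (2 ^ T.length) (List.replicate T.length (0 : Int))),
         pvTset (List.replicate (2 ^ T.length) (List.replicate T.length (0 : Int)))
           (2 ^ j.toNat) j.toNat 1)).1 A i.toNat = pvE T A i.toNat := by
      rw [(hval A i.toNat hAlt hin).1]
      by_cases hAs : A = 2 ^ i.toNat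
      · rw [if_pos ⟨hc.1, Or.inl hAs⟩]
      · rw [if_pos ⟨hc.1, Or.inr hAlt⟩]
    rw [hge]
    congr 1
    rw [pv_foldl_sum, zero_add]
    apply Finset.sum_congr rfl
    intro v hv
    have hvn : v < T.length := Finset.mem_range.1 hv
    rw [(hval ((2 ^ T.length - 1) ^^^ A) v hB hvn).2]
    by_cases hbv : ((2 ^ T.length - 1) ^^^ A).testBit v
    · rw [if_pos ⟨hbv, Or.inr hB⟩]
    · rw [if_neg (by rintro ⟨hb, _⟩; exact hbv hb), pvP_notBit (by simpa using hbv)]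
  · rw [if_neg hc, if_neg hc]

-- ---- the splitting identity: dp_used = prefix x suffix convolution ----
lemma pv_sub_bit {A m : Nat} (h : A ||| m = m) (k : Nat) :
    (m ^^^ A).testBit k = (m.testBit k && ! A.testBit k) := by
  cases hA : A.testBit k
  · simp [Nat.testBit_xor, hA]
  · have hm := pv_subset_testBit h hA
    simp [Nat.testBit_xor, hA, hm]

lemma pv_decomp {A m v : Nat} (hbv : m.testBit v = true) (hsub : A ||| (m ^^^ 2 ^ v) = m ^^^ 2 ^ v) :
    m ^^^ A = ((m ^^^ 2 ^ v) ^^^ A) ||| 2 ^ v := by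
  have hAv : A.testBit v = false := by
    cases hA : A.testBit v
    · rfl
    · have := pv_subset_testBit hsub hA
      rw [pv_testBit_xor_self, hbv] at this
      cases this
  apply Nat.eq_of_testBit_eq
  intro k
  by_cases hk : v = k
  · subst hk
    simp [Nat.testBit_xor, Nat.testBit_or, Nat.testBit_two_pow, hbv, hAv, pv_testBit_xor_self]
  · cases hm : m.testBit k <;> cases hA2 : A.testBit k <;>
      simp [Nat.testBit_xor, Nat.testBit_or, Nat.testBit_two_pow, hk, hm, hA2]

lemma pvMain (T : List (List Int)) (i j : Int) (hi : 0 ≤ i) (hj : 0 ≤ j)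
    (hin : i.toNat < T.length) (hjn : j.toNat < T.length)
    (hT : pvGet2 T i.toNat j.toNat ≠ 0) :
    ∀ m, m < 2 ^ T.length → ∀ v, pvU T i j m v =
      ∑ A ∈ Finset.range (2 ^ T.length),
        (if A ||| m = m ∧ A.testBit i.toNat ∧ (m ^^^ A).testBit j.toNat
         then pvE T A i.toNat * pvP T j.toNat (m ^^^ A) v else 0) := by
  intro m
  induction m using Nat.strong_induction_on with
  | _ m ih =>
    intro hm v
    by_cases hbv : m.testBit v
    · by_cases hms : m = 2 ^ v
      · rw [hms, pvU_single]
        symm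
        apply Finset.sum_eq_zero
        intro A hA
        rw [if_neg]
        rintro ⟨hsub, hAin, hBjn⟩
        have hiv : i.toNat = v := by
          have := pv_subset_testBit hsub hAin
          rw [Nat.testBit_two_pow] at this
          exact (of_decide_eq_true this).symm
        have hjv : j.toNat = v := by
          have h1 := pv_sub_bit hsub j.toNat
          rw [hBjn] at h1
          have h2 : (2 ^ v).testBit j.toNat = true := by
            cases h3 : (2 ^ v).testBit j.toNat
            · rw [h3] at h1; simp at h1
            · rfl
          rw [Nat.testBit_two_pow] at h2
          exact (of_decide_eq_true h2).symm
        have h1 := pv_sub_bit hsub j.toNat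
        rw [hBjn] at h1
        have hAv : A.testBit j.toNat = false := by
          cases h3 : A.testBit j.toNat
          · rfl
          · rw [h3] at h1; simp at h1
        rw [hjv] at hAv
        rw [hiv] at hAin
        rw [hAin] at hAv
        cases hAv
      · -- main recursive case
        rw [pvU_rec hbv hms]
        have hrlt : m ^^^ 2 ^ v < m := pv_xor_lt hbv
        have hrlt2 : m ^^^ 2 ^ v < 2 ^ T.length := by omega
        have hrv : (m ^^^ 2 ^ v).testBit v = false := by
          rw [pv_testBit_xor_self, hbv]; rfl
        have hmr : (m ^^^ 2 ^ v) ||| 2 ^ v = m := pv_xor_or hbv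
        -- split the recursive sum into the carried part and the freshly-used part
        have hL : (∑ u ∈ Finset.range T.length,
            (if (m ^^^ 2 ^ v).testBit u ∧ pvGet2 T u v ≠ 0
             then pvU T i j (m ^^^ 2 ^ v) u +
               (if (u : Int) = i ∧ (v : Int) = j then pvE T (m ^^^ 2 ^ v) u else 0)
             else 0)) =
            (∑ u ∈ Finset.range T.length,
              (if (m ^^^ 2 ^ v).testBit u ∧ pvGet2 T u v ≠ 0
               then pvU T i j (m ^^^ 2 ^ v) u else 0)) +
            (∑ u ∈ Finset.range T.length,
              (if (m ^^^ 2 ^ v).testBit u ∧ pvGet2 T u v ≠ 0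
               then (if (u : Int) = i ∧ (v : Int) = j then pvE T (m ^^^ 2 ^ v) u else 0)
               else 0)) := by
          rw [← Finset.sum_add_distrib]
          apply Finset.sum_congr rfl
          intro u _
          by_cases hc : (m ^^^ 2 ^ v).testBit u ∧ pvGet2 T u v ≠ 0
          · rw [if_pos hc, if_pos hc, if_pos hc]
          · rw [if_neg hc, if_neg hc, if_neg hc]; ring
        rw [hL]
        -- the freshly-used part
        have hdelta : (∑ u ∈ Finset.range T.length,
            (if (m ^^^ 2 ^ v).testBit u ∧ pvGet2 T u v ≠ 0
             then (if (u : Int) = i ∧ (v : Int) = j then pvE T (m ^^^ 2 ^ v) u else 0)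
             else 0)) =
            (if (m ^^^ 2 ^ v).testBit i.toNat ∧ v = j.toNat
             then pvE T (m ^^^ 2 ^ v) i.toNat else 0) := by
          rw [Finset.sum_eq_single_of_mem i.toNat (Finset.mem_range.2 hin)]
          · by_cases hvj : v = j.toNat
            · by_cases hbi : (m ^^^ 2 ^ v).testBit i.toNat
              · have hgv : pvGet2 T i.toNat v ≠ 0 := by rw [hvj]; exact hT
                rw [if_pos ⟨hbi, hgv⟩, if_pos ⟨by omega, by omega⟩, if_pos ⟨hbi, hvj⟩]
              · rw [if_neg (by rintro ⟨hb, _⟩; exact hbi hb),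
                   if_neg (by rintro ⟨hb, _⟩; exact hbi hb)]
            · have hnotij : ¬ ((i.toNat : Int) = i ∧ (v : Int) = j) := by
                rintro ⟨_, h2⟩; exact hvj (by omega)
              have hR0 : (if (m ^^^ 2 ^ v).testBit i.toNat = true ∧ v = j.toNat
                  then pvE T (m ^^^ 2 ^ v) i.toNat else 0) = 0 :=
                if_neg (by rintro ⟨_, h2⟩; exact hvj h2)
              rw [hR0]
              by_cases houter : (m ^^^ 2 ^ v).testBit i.toNat ∧ pvGet2 T i.toNat v ≠ 0
              · rw [if_pos houter, if_neg hnotij]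
              · rw [if_neg houter]
          · intro u _ hne
            have hnotu : ¬ ((u : Int) = i ∧ (v : Int) = j) := by
              rintro ⟨h1, _⟩; exact hne (by omega)
            by_cases houter : (m ^^^ 2 ^ v).testBit u ∧ pvGet2 T u v ≠ 0
            · rw [if_pos houter, if_neg hnotu]
            · rw [if_neg houter]
        rw [hdelta]
        -- the carried part, via the induction hypothesis and an index shift
        have hCarry : (∑ u ∈ Finset.range T.length,
            (if (m ^^^ 2 ^ v).testBit u ∧ pvGet2 T u v ≠ 0
             then pvU T i j (m ^^^ 2 ^ v) u else 0)) =
            ∑ A ∈ Finset.range (2 ^ T.length),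
              (if A ||| (m ^^^ 2 ^ v) = m ^^^ 2 ^ v ∧ A.testBit i.toNat ∧
                  ((m ^^^ 2 ^ v) ^^^ A).testBit j.toNat
               then pvE T A i.toNat *
                 pvP T j.toNat (((m ^^^ 2 ^ v) ^^^ A) ||| 2 ^ v) v else 0) := by
          have h1 : ∀ u, (if (m ^^^ 2 ^ v).testBit u ∧ pvGet2 T u v ≠ 0
              then pvU T i j (m ^^^ 2 ^ v) u else 0) =
              ∑ A ∈ Finset.range (2 ^ T.length),
                (if (m ^^^ 2 ^ v).testBit u ∧ pvGet2 T u v ≠ 0 then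
                  (if A ||| (m ^^^ 2 ^ v) = m ^^^ 2 ^ v ∧ A.testBit i.toNat ∧
                      ((m ^^^ 2 ^ v) ^^^ A).testBit j.toNat
                   then pvE T A i.toNat * pvP T j.toNat ((m ^^^ 2 ^ v) ^^^ A) u else 0)
                 else 0) := by
            intro u
            by_cases hc : (m ^^^ 2 ^ v).testBit u ∧ pvGet2 T u v ≠ 0
            · rw [if_pos hc, ih (m ^^^ 2 ^ v) hrlt hrlt2 u]
              apply Finset.sum_congr rfl
              intro A _
              rw [if_pos hc]
            · rw [if_neg hc]
              symm
              apply Finset.sum_eq_zero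
              intro A _
              rw [if_neg hc]
          calc (∑ u ∈ Finset.range T.length,
              (if (m ^^^ 2 ^ v).testBit u ∧ pvGet2 T u v ≠ 0
               then pvU T i j (m ^^^ 2 ^ v) u else 0))
              = ∑ u ∈ Finset.range T.length, ∑ A ∈ Finset.range (2 ^ T.length),
                (if (m ^^^ 2 ^ v).testBit u ∧ pvGet2 T u v ≠ 0 then
                  (if A ||| (m ^^^ 2 ^ v) = m ^^^ 2 ^ v ∧ A.testBit i.toNat ∧
                      ((m ^^^ 2 ^ v) ^^^ A).testBit j.toNat
                   then pvE T A i.toNat * pvP T j.toNat ((m ^^^ 2 ^ v) ^^^ A) u else 0)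
                 else 0) := Finset.sum_congr rfl (fun u _ => h1 u)
            _ = ∑ A ∈ Finset.range (2 ^ T.length), ∑ u ∈ Finset.range T.length,
                (if (m ^^^ 2 ^ v).testBit u ∧ pvGet2 T u v ≠ 0 then
                  (if A ||| (m ^^^ 2 ^ v) = m ^^^ 2 ^ v ∧ A.testBit i.toNat ∧
                      ((m ^^^ 2 ^ v) ^^^ A).testBit j.toNat
                   then pvE T A i.toNat * pvP T j.toNat ((m ^^^ 2 ^ v) ^^^ A) u else 0)
                 else 0) := Finset.sum_comm
            _ = ∑ A ∈ Finset.range (2 ^ T.length),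
              (if A ||| (m ^^^ 2 ^ v) = m ^^^ 2 ^ v ∧ A.testBit i.toNat ∧
                  ((m ^^^ 2 ^ v) ^^^ A).testBit j.toNat
               then pvE T A i.toNat *
                 pvP T j.toNat (((m ^^^ 2 ^ v) ^^^ A) ||| 2 ^ v) v else 0) := by
                apply Finset.sum_congr rfl
                intro A _
                by_cases hcA : A ||| (m ^^^ 2 ^ v) = m ^^^ 2 ^ v ∧ A.testBit i.toNat ∧
                    ((m ^^^ 2 ^ v) ^^^ A).testBit j.toNat
                · obtain ⟨hsubA, hAin, hAjn⟩ := hcA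
                  rw [if_pos ⟨hsubA, hAin, hAjn⟩]
                  have hinner : ∀ u, (if (m ^^^ 2 ^ v).testBit u ∧ pvGet2 T u v ≠ 0 then
                      (if A ||| (m ^^^ 2 ^ v) = m ^^^ 2 ^ v ∧ A.testBit i.toNat ∧
                          ((m ^^^ 2 ^ v) ^^^ A).testBit j.toNat
                       then pvE T A i.toNat * pvP T j.toNat ((m ^^^ 2 ^ v) ^^^ A) u else 0)
                     else 0) =
                      (if (m ^^^ 2 ^ v).testBit u ∧ pvGet2 T u v ≠ 0
                       then pvE T A i.toNat * pvP T j.toNat ((m ^^^ 2 ^ v) ^^^ A) u else 0) := by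
                    intro u
                    by_cases hcu : (m ^^^ 2 ^ v).testBit u ∧ pvGet2 T u v ≠ 0
                    · rw [if_pos hcu, if_pos hcu, if_pos ⟨hsubA, hAin, hAjn⟩]
                    · rw [if_neg hcu, if_neg hcu]
                  rw [Finset.sum_congr rfl (fun u _ => hinner u)]
                  -- the inner sum is exactly pvP of the extended suffix mask
                  have hB'sub : ((m ^^^ 2 ^ v) ^^^ A) ||| (m ^^^ 2 ^ v) = m ^^^ 2 ^ v := by
                    apply Nat.eq_of_testBit_eq
                    intro k
                    rw [Nat.testBit_or, pv_sub_bit hsubA k]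
                    cases hr : (m ^^^ 2 ^ v).testBit k <;> simp
                  have hB'v : ((m ^^^ 2 ^ v) ^^^ A).testBit v = false := by
                    rw [pv_sub_bit hsubA v, hrv]; rfl
                  have hne : ((m ^^^ 2 ^ v) ^^^ A) ||| 2 ^ v ≠ 2 ^ v := by
                    intro heq
                    have h1 : (((m ^^^ 2 ^ v) ^^^ A) ||| 2 ^ v).testBit j.toNat = true := by
                      rw [Nat.testBit_or, hAjn]; rfl
                    rw [heq, Nat.testBit_two_pow] at h1
                    have hvj : v = j.toNat := of_decide_eq_true h1
                    rw [← hvj] at hAjn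
                    rw [hB'v] at hAjn
                    cases hAjn
                  rw [pvP_rec pv_testBit_or_self hne, pv_or_xor hB'v, Finset.mul_sum]
                  apply Finset.sum_congr rfl
                  intro u _
                  by_cases hbu : ((m ^^^ 2 ^ v) ^^^ A).testBit u
                  · have hrestu : (m ^^^ 2 ^ v).testBit u = true :=
                      pv_subset_testBit hB'sub hbu
                    by_cases hgu : pvGet2 T u v ≠ 0
                    · rw [if_pos ⟨hrestu, hgu⟩, if_pos ⟨hbu, hgu⟩]
                    · rw [if_neg (by rintro ⟨_, hg⟩; exact hgu hg),
                         if_neg (by rintro ⟨_, hg⟩; exact hgu hg), mul_zero]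
                  · have hbuF : ((m ^^^ 2 ^ v) ^^^ A).testBit u = false := by
                      simpa using hbu
                    have hR : (if (m ^^^ 2 ^ v ^^^ A).testBit u = true ∧ pvGet2 T u v ≠ 0
                        then pvP T j.toNat (m ^^^ 2 ^ v ^^^ A) u else 0) = 0 :=
                      if_neg (by rintro ⟨hb, _⟩; exact hbu hb)
                    rw [hR, mul_zero]
                    by_cases hcu : (m ^^^ 2 ^ v).testBit u = true ∧ pvGet2 T u v ≠ 0
                    · rw [if_pos hcu, pvP_notBit hbuF, mul_zero]
                    · rw [if_neg hcu]
                · rw [if_neg hcA]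
                  apply Finset.sum_eq_zero
                  intro u _
                  by_cases hcu : (m ^^^ 2 ^ v).testBit u ∧ pvGet2 T u v ≠ 0
                  · rw [if_pos hcu, if_neg hcA]
                  · rw [if_neg hcu]
        rw [hCarry]
        -- now compare with the right-hand side, splitting off the term A = m ^^^ 2 ^ v
        have hrmem : m ^^^ 2 ^ v ∈ Finset.range (2 ^ T.length) := Finset.mem_range.2 hrlt2
        have hrhs : ∑ A ∈ Finset.range (2 ^ T.length),
            (if A ||| m = m ∧ A.testBit i.toNat ∧ (m ^^^ A).testBit j.toNat
             then pvE T A i.toNat * pvP T j.toNat (m ^^^ A) v else 0) =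
            (∑ A ∈ Finset.range (2 ^ T.length) \ {m ^^^ 2 ^ v},
              (if A ||| m = m ∧ A.testBit i.toNat ∧ (m ^^^ A).testBit j.toNat
               then pvE T A i.toNat * pvP T j.toNat (m ^^^ A) v else 0)) +
            (if (m ^^^ 2 ^ v) ||| m = m ∧ (m ^^^ 2 ^ v).testBit i.toNat ∧
                (m ^^^ (m ^^^ 2 ^ v)).testBit j.toNat
             then pvE T (m ^^^ 2 ^ v) i.toNat * pvP T j.toNat (m ^^^ (m ^^^ 2 ^ v)) v else 0) :=
          Finset.sum_eq_sum_diff_singleton_add hrmem _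
        have hlhs : ∑ A ∈ Finset.range (2 ^ T.length),
            (if A ||| (m ^^^ 2 ^ v) = m ^^^ 2 ^ v ∧ A.testBit i.toNat ∧
                ((m ^^^ 2 ^ v) ^^^ A).testBit j.toNat
             then pvE T A i.toNat * pvP T j.toNat (((m ^^^ 2 ^ v) ^^^ A) ||| 2 ^ v) v else 0) =
            (∑ A ∈ Finset.range (2 ^ T.length) \ {m ^^^ 2 ^ v},
              (if A ||| (m ^^^ 2 ^ v) = m ^^^ 2 ^ v ∧ A.testBit i.toNat ∧
                  ((m ^^^ 2 ^ v) ^^^ A).testBit j.toNat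
               then pvE T A i.toNat * pvP T j.toNat (((m ^^^ 2 ^ v) ^^^ A) ||| 2 ^ v) v else 0)) +
            (if (m ^^^ 2 ^ v) ||| (m ^^^ 2 ^ v) = m ^^^ 2 ^ v ∧ (m ^^^ 2 ^ v).testBit i.toNat ∧
                ((m ^^^ 2 ^ v) ^^^ (m ^^^ 2 ^ v)).testBit j.toNat
             then pvE T (m ^^^ 2 ^ v) i.toNat *
               pvP T j.toNat (((m ^^^ 2 ^ v) ^^^ (m ^^^ 2 ^ v)) ||| 2 ^ v) v else 0) :=
          Finset.sum_eq_sum_diff_singleton_add hrmem _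
        have hlast : (if (m ^^^ 2 ^ v) ||| (m ^^^ 2 ^ v) = m ^^^ 2 ^ v ∧ (m ^^^ 2 ^ v).testBit i.toNat ∧
                ((m ^^^ 2 ^ v) ^^^ (m ^^^ 2 ^ v)).testBit j.toNat
             then pvE T (m ^^^ 2 ^ v) i.toNat *
               pvP T j.toNat (((m ^^^ 2 ^ v) ^^^ (m ^^^ 2 ^ v)) ||| 2 ^ v) v else 0) = 0 := by
          rw [if_neg]
          rintro ⟨_, _, hz⟩
          rw [Nat.xor_self] at hz
          simp at hz
        rw [hrhs, hlhs, hlast, add_zero]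
        congr 1
        · -- termwise over A ≠ m ^^^ 2 ^ v
          apply Finset.sum_congr rfl
          intro A hA
          have hAne : A ≠ m ^^^ 2 ^ v := by
            intro h
            rw [h] at hA
            exact absurd (Finset.mem_sdiff.1 hA).2 (by simp)
          have hAlt : A < 2 ^ T.length := Finset.mem_range.1 (Finset.mem_sdiff.1 hA).1
          by_cases hcL : A ||| (m ^^^ 2 ^ v) = m ^^^ 2 ^ v ∧ A.testBit i.toNat ∧
              ((m ^^^ 2 ^ v) ^^^ A).testBit j.toNat
          · obtain ⟨hsubA, hAin, hAjn⟩ := hcL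
            have hdec := pv_decomp hbv hsubA
            have hsubm : A ||| m = m := by
              rw [← hmr]
              apply Nat.eq_of_testBit_eq
              intro k
              have h1 := congrArg (fun x => x.testBit k) hsubA
              simp only [Nat.testBit_or] at h1 ⊢
              cases hAk : A.testBit k
              · simp
              · rw [hAk] at h1
                simp at h1
                simp [hAk, h1]
            have hmjn : (m ^^^ A).testBit j.toNat = true := by
              rw [hdec, Nat.testBit_or, hAjn]; rfl
            rw [if_pos ⟨hsubA, hAin, hAjn⟩, if_pos ⟨hsubm, hAin, hmjn⟩, hdec]
          · rw [if_neg hcL]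
            by_cases hcR : A ||| m = m ∧ A.testBit i.toNat ∧ (m ^^^ A).testBit j.toNat
            · obtain ⟨hsubm, hAin, hAjn⟩ := hcR
              rw [if_pos ⟨hsubm, hAin, hAjn⟩]
              by_cases hAv : A.testBit v
              · have : (m ^^^ A).testBit v = false := by
                  rw [pv_sub_bit hsubm, hAv]; simp
                rw [pvP_notBit this, mul_zero]
              · have hAvF : A.testBit v = false := by simpa using hAv
                have hsubA : A ||| (m ^^^ 2 ^ v) = m ^^^ 2 ^ v := by
                  apply Nat.eq_of_testBit_eq
                  intro k
                  by_cases hk : v = k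
                  · subst hk
                    simp [Nat.testBit_or, hAvF]
                  · have h1 := congrArg (fun x => x.testBit k) hsubm
                    simp only [Nat.testBit_or] at h1
                    simp only [Nat.testBit_or, Nat.testBit_xor, Nat.testBit_two_pow]
                    have : decide (v = k) = false := by simpa using hk
                    rw [this]
                    cases hAk : A.testBit k
                    · simp
                    · rw [hAk] at h1
                      simp at h1
                      simp [h1]
                have hjv : j.toNat = v := by
                  have h1 : ¬ ((m ^^^ 2 ^ v) ^^^ A).testBit j.toNat := fun hh =>
                    hcL ⟨hsubA, hAin, hh⟩
                  have h2 := pv_decomp hbv hsubA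
                  rw [h2, Nat.testBit_or] at hAjn
                  cases h3 : ((m ^^^ 2 ^ v) ^^^ A).testBit j.toNat
                  · rw [h3] at hAjn
                    simp at hAjn
                    rw [Nat.testBit_two_pow] at hAjn
                    exact (of_decide_eq_true hAjn).symm
                  · exact absurd h3 h1
                have hPz : pvP T j.toNat (m ^^^ A) v = 0 := by
                  rw [← hjv, pvP_self, if_neg]
                  intro heq
                  have hx : m ^^^ (m ^^^ A) = A := by
                    rw [← Nat.xor_assoc, Nat.xor_self, Nat.zero_xor]
                  have hA' : A = m ^^^ 2 ^ j.toNat := by rw [← hx, heq]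
                  rw [hjv] at hA'
                  exact hAne hA'
                rw [hPz, mul_zero]
            · rw [if_neg hcR]
        · -- the split-off term equals the freshly-used part
          by_cases hbi : (m ^^^ 2 ^ v).testBit i.toNat ∧ v = j.toNat
          · have hsub' : (m ^^^ 2 ^ v) ||| m = m := by
              rw [← hmr]
              apply Nat.eq_of_testBit_eq
              intro k
              cases h1 : (m ^^^ 2 ^ v).testBit k <;> cases h2 : (2 ^ v).testBit k <;>
                simp [Nat.testBit_or, h1, h2]
            have hxx : m ^^^ (m ^^^ 2 ^ v) = 2 ^ v := by
              rw [← Nat.xor_assoc, Nat.xor_self, Nat.zero_xor]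
            rw [if_pos hbi, if_pos ⟨hsub', hbi.1, by
              rw [hxx, Nat.testBit_two_pow]
              exact decide_eq_true hbi.2⟩]
            rw [hxx, ← hbi.2, pvP_single, if_pos rfl, mul_one]
          · rw [if_neg hbi, if_neg]
            rintro ⟨_, hbin, hbjn⟩
            apply hbi
            have hxx : m ^^^ (m ^^^ 2 ^ v) = 2 ^ v := by
              rw [← Nat.xor_assoc, Nat.xor_self, Nat.zero_xor]
            rw [hxx, Nat.testBit_two_pow] at hbjn
            exact ⟨hbin, of_decide_eq_true hbjn⟩
    · have hbvF : m.testBit v = false := by simpa using hbv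
      rw [pvU_notBit hbvF]
      symm
      apply Finset.sum_eq_zero
      intro A hA
      by_cases hcond : A ||| m = m ∧ A.testBit i.toNat ∧ (m ^^^ A).testBit j.toNat
      · rw [if_pos hcond]
        have : (m ^^^ A).testBit v = false := by
          rw [pv_sub_bit hcond.1, hbvF]; rfl
        rw [pvP_notBit this, mul_zero]
      · rw [if_neg hcond]

-- ---- the guard under Pre_ ----
lemma pv_arc_eq (T : List (List Int)) (i j : Int)
    (hi : 0 ≤ i) (hilt : i < (T.length : Int)) (hj : 0 ≤ j)
    (hrows : ∀ row ∈ T, T.length ≤ row.length) (hjlt : j < (T.length : Int)) :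
    pvArc T i j = pvGet2 T i.toNat j.toNat := by
  unfold pvArc pvGet2
  have hin : i.toNat < T.length := by omega
  rw [PySem.List.pyGet?_of_nonneg T hi, List.getElem?_eq_getElem hin]
  have hrow : T.length ≤ T[i.toNat].length := hrows _ (List.getElem_mem hin)
  have hjn : j.toNat < T[i.toNat].length := by omega
  have hb : (some T[i.toNat]).bind (fun r => PySem.List.pyGet? r j) =
      PySem.List.pyGet? T[i.toNat] j := by simp
  rw [hb, PySem.List.pyGet?_of_nonneg T[i.toNat] hj, List.getElem?_eq_getElem hjn,
     Option.getD_some]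
  simp [List.getD_eq_getElem?_getD, List.getElem?_eq_getElem hin, List.getElem?_eq_getElem hjn]

lemma pv_final : ∀ (T : List (List Int)) (i : Int) (j : Int),
    Pre_paths_using_arc T i j → paths_using_arc T i j = paths_using_arc_alt T i j := by
  intro T i j hPre
  by_cases hg : pvArc T i j = 0
  · simp only [paths_using_arc, paths_using_arc_alt]
    rw [if_pos hg, if_pos hg]
  · obtain ⟨hi, hilt, hj, hjlt, hrows⟩ := hPre.2 hg
    have hin : i.toNat < T.length := by omega
    have hjn : j.toNat < T.length := by omega
    have harc := pv_arc_eq T i j hi hilt hj hrows hjlt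
    rw [pvA_value T i j hg, pvB_value T i j hg hjn]
    have hT : pvGet2 T i.toNat j.toNat ≠ 0 := by rw [← harc]; exact hg
    have hfull : 2 ^ T.length - 1 < 2 ^ T.length := by
      have := Nat.one_le_two_pow (n := T.length); omega
    calc ∑ v ∈ Finset.range T.length, pvU T i j (2 ^ T.length - 1) v
        = ∑ v ∈ Finset.range T.length, ∑ A ∈ Finset.range (2 ^ T.length),
            (if A ||| (2 ^ T.length - 1) = (2 ^ T.length - 1) ∧ A.testBit i.toNat ∧
                ((2 ^ T.length - 1) ^^^ A).testBit j.toNat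
             then pvE T A i.toNat * pvP T j.toNat ((2 ^ T.length - 1) ^^^ A) v else 0) :=
          Finset.sum_congr rfl (fun v _ => pvMain T i j hi hj hin hjn hT _ hfull v)
      _ = ∑ A ∈ Finset.range (2 ^ T.length), ∑ v ∈ Finset.range T.length,
            (if A ||| (2 ^ T.length - 1) = (2 ^ T.length - 1) ∧ A.testBit i.toNat ∧
                ((2 ^ T.length - 1) ^^^ A).testBit j.toNat
             then pvE T A i.toNat * pvP T j.toNat ((2 ^ T.length - 1) ^^^ A) v else 0) :=
          Finset.sum_comm
      _ = ∑ A ∈ Finset.range (2 ^ T.length),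
            (if A.testBit i.toNat ∧ ¬ A.testBit j.toNat then
              pvE T A i.toNat *
                (∑ v ∈ Finset.range T.length, pvP T j.toNat ((2 ^ T.length - 1) ^^^ A) v)
             else 0) := by
          apply Finset.sum_congr rfl
          intro A hA
          have hAlt := Finset.mem_range.1 hA
          have hsub : A ||| (2 ^ T.length - 1) = 2 ^ T.length - 1 := pv_lt_subset hAlt
          by_cases hc : A.testBit i.toNat ∧ ¬ A.testBit j.toNat
          · have hAjF : A.testBit j.toNat = false := by
              cases h : A.testBit j.toNat
              · rfl
              · exact absurd h hc.2
            have hjb : ((2 ^ T.length - 1) ^^^ A).testBit j.toNat = true := by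
              rw [pv_sub_bit hsub, Nat.testBit_two_pow_sub_one, hAjF]
              simp [hjn]
            rw [if_pos hc, Finset.mul_sum]
            apply Finset.sum_congr rfl
            intro v _
            rw [if_pos ⟨hsub, hc.1, hjb⟩]
          · rw [if_neg hc]
            apply Finset.sum_eq_zero
            intro v _
            rw [if_neg]
            rintro ⟨_, hAin, hAjn⟩
            apply hc
            refine ⟨hAin, ?_⟩
            rw [pv_sub_bit hsub, Nat.testBit_two_pow_sub_one] at hAjn
            intro hAj
            rw [hAj] at hAjn
            simp at hAjn

-- ===== VERDICT (by name: the statement is the Claim_ definition above) =====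
theorem paths_using_arc_spec : Claim_equal_paths_using_arc := by
  intro T i j _ hPre
  show paths_using_arc T i j = paths_using_arc_alt T i j
  exact pv_final T i j hPre
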